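-- pv_equiv track=rewrite | github.com/oyings/nullitic-algorithm | Jeongha/Week2/PM_154540.py | solution
-- ===== SOURCE A (Python) =====
-- from collections import deque
--
-- def make_graph(maps, col, row):
--     graph = [[''] * col for _ in range(row)]
--
--     for i in range(row):
--         for j in range(col):
--             graph[i][j] = maps[i][j]
--
--     return graph
--
-- def BFS(graph, visited, x, y, row, col):
--     dx = [1, 0, -1, 0]
--     dy = [0, 1, 0, -1]
--
--     count = 0
--     queue = deque()
--     queue.append((x, y))
--     count += int(graph[x][y])
--
--     while queue:
--         x, y = queue.popleft()
--         visited[x][y] = True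
--         for i in range(4):
--             nx = x + dx[i]
--             ny = y + dy[i]
--             if 0 <= nx and nx < row and 0 <= ny and ny < col:
--                 if graph[nx][ny] != 'X' and visited[nx][ny] == False:
--                     queue.append((nx, ny))
--                     visited[nx][ny] = True
--                     count += int(graph[nx][ny])
--     return count
--
-- def solution(maps):
--     answer = []
--
--     # 행 열 지정
--     col = len(maps[0])
--     row = len(maps)
--
--     # 2차원 배열에 담기
--     graph = make_graph(maps, col, row)
--
--
--     # BFS 수행하기
--     visited = [[False] * col for _ in range(row)]
--
--     for i in range(row):
--         for j in range(col):
--             # 방문하지 않은 새로운 숫자라면 새로운 섬을 의미한다.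
--             if visited[i][j] == False and graph[i][j] != 'X':
--                 # 반환받은 count값을 answer에 넣는다.
--                 answer.append(BFS(graph, visited, i, j, row, col))
--
--     # 결과 반환
--     answer.sort()
--     if len(answer) == 0:
--         answer.append(-1)
--         return answer
--     return answer
-- ===== SOURCE B (Python) =====
-- def solution(maps):
--     col = len(maps[0])
--     row = len(maps)
--     n = row * col
--     # union-find over cell indices i*col+j; roots are the minimal index of their
--     # class, so following parent links strictly decreases: "while parent[i] < i".
--     parent = list(range(n))
--
--     def find(i):
--         while parent[i] < i:
--             i = parent[i]
--         return i
--
--     def union(a, b):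
--         ra = find(a)
--         rb = find(b)
--         if ra == rb:
--             return
--         if ra < rb:
--             parent[rb] = ra
--         else:
--             parent[ra] = rb
--
--     for i in range(row):
--         for j in range(col):
--             if maps[i][j] != 'X':
--                 if i + 1 < row and maps[i + 1][j] != 'X':
--                     union(i * col + j, (i + 1) * col + j)
--                 if j + 1 < col and maps[i][j + 1] != 'X':
--                     union(i * col + j, i * col + j + 1)
--
--     sums = {}
--     for i in range(row):
--         for j in range(col):
--             if maps[i][j] != 'X':
--                 r = find(i * col + j)
--                 sums[r] = sums.get(r, 0) + int(maps[i][j])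
--
--     vals = sorted(sums.values())
--     return vals if vals else [-1]
-- ===== Notes on version B (the rewrite author's own statement) =====
-- stated objective: alternative
-- what changed: Replaces the BFS flood fill (graph copy, visited matrix, deque) by a union-find over cell indices: one pass unions each non-'X' cell with its right and down non-'X' neighbours, a second pass accumulates int(maps[i][j]) into a dict keyed by the cell's root, and the sorted dict values (or [-1]) are returned.
import Mathlib
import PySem

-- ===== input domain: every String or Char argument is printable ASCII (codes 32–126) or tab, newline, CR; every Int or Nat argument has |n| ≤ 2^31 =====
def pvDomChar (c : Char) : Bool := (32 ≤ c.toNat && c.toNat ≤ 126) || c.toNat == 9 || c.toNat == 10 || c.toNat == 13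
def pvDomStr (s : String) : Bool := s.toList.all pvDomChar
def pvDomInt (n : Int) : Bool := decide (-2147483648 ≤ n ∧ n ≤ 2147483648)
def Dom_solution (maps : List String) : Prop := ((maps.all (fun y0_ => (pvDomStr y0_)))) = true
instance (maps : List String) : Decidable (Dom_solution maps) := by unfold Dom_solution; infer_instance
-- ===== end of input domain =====

-- B replaces A's BFS flood fill (graph copy, visited matrix, deque) by a union-find over
-- cell indices: one pass unions each non-'X' cell with its right and down non-'X'
-- neighbours, a second pass accumulates the digit values into a dict keyed by each cell's
-- root, and the sorted dict values (or [-1]) are returned ("alternative", not claimed faster).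

-- ===== PORT A =====
-- low-level accessors (exact where the Python reads them; see comments)

-- int(c) for a one-character digit string: exact on '0'..'9' (the only cells int() is
-- applied to under Pre_solution)
def pvIntOfCell (c : Char) : Int := (c.toNat : Int) - 48

-- maps[i][j] : exact (including Python's negative wrap) whenever the access is in range;
-- out-of-range (where Python would raise, unreachable under Pre_solution and the bounds
-- guards) defaults to 'X'
def pvCharAt (maps : List String) (i j : Int) : Char :=
  (((PySem.List.pyGet? maps i).map String.toList).bind (fun r => PySem.List.pyGet? r j)).getD 'X'

-- graph[i][j] (same access pattern on the copied grid)
def pvGraphAt (g : List (List Char)) (i j : Int) : Char :=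
  ((PySem.List.pyGet? g i).bind (fun r => PySem.List.pyGet? r j)).getD 'X'

-- visited[x][y] : exact in range (the Python only reads it under the bounds guards);
-- the out-of-range default 'true' blocks enqueues, which also makes termination evident
def pvGetV (V : List (List Bool)) (x y : Int) : Bool :=
  ((PySem.List.pyGet? V x).bind (fun r => PySem.List.pyGet? r y)).getD true

-- visited[x][y] = True (in-place row update; Python index semantics via pySetD)
def pvSetV (V : List (List Bool)) (x y : Int) : List (List Bool) :=
  PySem.List.pySetD V x (PySem.List.pySetD (PySem.List.pyGetD V x []) y true)

def make_graph (maps : List String) (col row : Int) : List (List Char) :=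
  (PySem.List.pyRange 0 row 1).map (fun i =>
    (PySem.List.pyRange 0 col 1).map (fun j => pvCharAt maps i j))

def pvFalseCount (V : List (List Bool)) : Nat :=
  (V.map (fun r => r.countP (fun b => !b))).sum

-- the `for i in range(4)` neighbour scan of one BFS iteration; state = (queue, visited, count)
def pvBfsExpand (g : List (List Char)) (row col x y : Int)
    (st : List (Int × Int) × List (List Bool) × Int) :
    List (Int × Int) × List (List Bool) × Int :=
  ([((1:Int),(0:Int)), (0,1), (-1,0), (0,-1)]).foldl (fun st d =>
    let nx := x + d.1
    let ny := y + d.2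
    if 0 ≤ nx ∧ nx < row ∧ 0 ≤ ny ∧ ny < col then
      if pvGraphAt g nx ny ≠ 'X' ∧ pvGetV st.2.1 nx ny = false then
        (st.1 ++ [(nx, ny)], pvSetV st.2.1 nx ny, st.2.2 + pvIntOfCell (pvGraphAt g nx ny))
      else st
    else st) st

-- termination bookkeeping for the two loops (cited in decreasing_by)
theorem pvPyIdx_lt (n : Nat) (i : Int) (k : Nat) (h : PySem.List.pyIdx? n i = some k) : k < n := by
  unfold PySem.List.pyIdx? at h
  split_ifs at h <;> simp_all <;> omega

theorem pvCfSet_le (l : List Bool) (n : Nat) :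
    (l.set n true).countP (fun b => !b) ≤ l.countP (fun b => !b) := by
  induction l generalizing n with
  | nil => simp
  | cons b t ih =>
    cases n with
    | zero => simp [List.countP_cons]
    | succ m => simp only [List.set_cons_succ, List.countP_cons]; have := ih m; omega

theorem pvCfSet_lt (l : List Bool) (n : Nat) (h : l[n]? = some false) :
    (l.set n true).countP (fun b => !b) < l.countP (fun b => !b) := by
  induction l generalizing n with
  | nil => simp at h
  | cons b t ih =>
    cases n with
    | zero =>
      simp at h; subst h
      simp
    | succ m =>
      simp only [List.getElem?_cons_succ] at h
      simp only [List.set_cons_succ, List.countP_cons]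
      have := ih m h; omega

theorem pvFcSet_le (V : List (List Bool)) (k : Nat) (r' : List Bool)
    (h : ∀ r, V[k]? = some r → r'.countP (fun b => !b) ≤ r.countP (fun b => !b)) :
    pvFalseCount (V.set k r') ≤ pvFalseCount V := by
  induction V generalizing k with
  | nil => simp
  | cons r t ih =>
    cases k with
    | zero =>
      have := h r (by simp)
      simp [pvFalseCount, List.set_cons_zero]; omega
    | succ m =>
      have := ih m (fun r hr => h r (by simpa using hr))
      simp only [pvFalseCount, List.set_cons_succ, List.map_cons, List.sum_cons] at *
      omega

theorem pvFcSet_lt (V : List (List Bool)) (k : Nat) (r' r : List Bool)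
    (hk : V[k]? = some r) (h : r'.countP (fun b => !b) < r.countP (fun b => !b)) :
    pvFalseCount (V.set k r') < pvFalseCount V := by
  induction V generalizing k with
  | nil => simp at hk
  | cons r0 t ih =>
    cases k with
    | zero =>
      simp at hk; subst hk
      simp [pvFalseCount, List.set_cons_zero]; omega
    | succ m =>
      simp only [List.getElem?_cons_succ] at hk
      have := ih m hk
      simp only [pvFalseCount, List.set_cons_succ, List.map_cons, List.sum_cons] at *
      omega

theorem pvGetV_false (V : List (List Bool)) (x y : Int) (h : pvGetV V x y = false) :
    ∃ k r m, PySem.List.pyIdx? V.length x = some k ∧ V[k]? = some r ∧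
      PySem.List.pyIdx? r.length y = some m ∧ r[m]? = some false := by
  unfold pvGetV PySem.List.pyGet? at h
  cases hk : PySem.List.pyIdx? V.length x with
  | none => rw [hk] at h; simp at h
  | some k =>
    rw [hk] at h
    simp only [Option.bind_some] at h
    cases hr : V[k]? with
    | none => rw [hr] at h; simp at h
    | some r =>
      rw [hr] at h
      simp only [Option.bind_some] at h
      cases hm : PySem.List.pyIdx? r.length y with
      | none => rw [hm] at h; simp at h
      | some m =>
        rw [hm] at h
        simp only [Option.bind_some] at h
        cases hv : r[m]? with
        | none => rw [hv] at h; simp at h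
        | some b =>
          rw [hv] at h; simp at h; subst h
          exact ⟨k, r, m, rfl, hr, hm, hv⟩

theorem pvSetV_none (V : List (List Bool)) (x y : Int)
    (hk : PySem.List.pyIdx? V.length x = none) : pvSetV V x y = V := by
  simp [pvSetV, PySem.List.pySetD, PySem.List.pySet?, hk]

theorem pvSetV_some (V : List (List Bool)) (x y : Int) (k : Nat) (r : List Bool)
    (hk : PySem.List.pyIdx? V.length x = some k) (hr : V[k]? = some r) :
    pvSetV V x y = V.set k (PySem.List.pySetD r y true) := by
  simp [pvSetV, PySem.List.pySetD, PySem.List.pySet?, PySem.List.pyGetD,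
    PySem.List.pyGet?, hk, hr]

theorem pvRowSetD_le (r : List Bool) (y : Int) :
    (PySem.List.pySetD r y true).countP (fun b => !b) ≤ r.countP (fun b => !b) := by
  unfold PySem.List.pySetD PySem.List.pySet?
  cases hm : PySem.List.pyIdx? r.length y with
  | none => simp
  | some m => simpa using pvCfSet_le r m

theorem pvFalseCount_setv_le (V : List (List Bool)) (x y : Int) :
    pvFalseCount (pvSetV V x y) ≤ pvFalseCount V := by
  cases hk : PySem.List.pyIdx? V.length x with
  | none => rw [pvSetV_none V x y hk]
  | some k =>
    have hklt := pvPyIdx_lt _ _ _ hk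
    have hr : V[k]? = some V[k] := List.getElem?_eq_getElem hklt
    rw [pvSetV_some V x y k _ hk hr]
    exact pvFcSet_le V k _ (fun r hr' => by
      rw [hr'] at hr; cases hr; exact pvRowSetD_le _ y)

theorem pvFalseCount_setv_lt (V : List (List Bool)) (x y : Int)
    (h : pvGetV V x y = false) :
    pvFalseCount (pvSetV V x y) < pvFalseCount V := by
  obtain ⟨k, r, m, hk, hr, hm, hv⟩ := pvGetV_false V x y h
  rw [pvSetV_some V x y k r hk hr]
  refine pvFcSet_lt V k _ r hr ?_
  unfold PySem.List.pySetD PySem.List.pySet?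
  rw [hm]
  simpa using pvCfSet_lt r m hv

theorem pvBfsExpand_measure (g : List (List Char)) (row col x y : Int)
    (st : List (Int × Int) × List (List Bool) × Int) :
    (pvBfsExpand g row col x y st).1.length + 2 * pvFalseCount (pvBfsExpand g row col x y st).2.1
      ≤ st.1.length + 2 * pvFalseCount st.2.1 := by
  unfold pvBfsExpand
  generalize ([((1:Int),(0:Int)), (0,1), (-1,0), (0,-1)]) = dirs
  induction dirs generalizing st with
  | nil => simp
  | cons d t ih =>
    simp only [List.foldl_cons]
    refine le_trans (ih _) ?_
    split_ifs with h1 h2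
    · obtain ⟨-, hget⟩ := h2
      have := pvFalseCount_setv_lt st.2.1 (x + d.1) (y + d.2) hget
      simp only [List.length_append, List.length_cons, List.length_nil]
      omega
    · exact le_refl _
    · exact le_refl _

-- the `while queue:` loop of BFS
def pvBfsLoop (g : List (List Char)) (row col : Int)
    (V : List (List Bool)) (Q : List (Int × Int)) (cnt : Int) : Int × List (List Bool) :=
  match Q with
  | [] => (cnt, V)
  | (x, y) :: rest =>
    let st := pvBfsExpand g row col x y (rest, pvSetV V x y, cnt)
    pvBfsLoop g row col st.2.1 st.1 st.2.2
termination_by Q.length + 2 * pvFalseCount V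
decreasing_by
  have h1 := pvBfsExpand_measure g row col x y (rest, pvSetV V x y, cnt)
  have h2 := pvFalseCount_setv_le V x y
  simp at h1
  simp only [List.length_cons]
  omega

def BFS (g : List (List Char)) (V : List (List Bool)) (x y row col : Int) :
    Int × List (List Bool) :=
  pvBfsLoop g row col V [(x, y)] (pvIntOfCell (pvGraphAt g x y))

def solution (maps : List String) : List Int :=
  -- len(maps[0]): maps = [] raises IndexError in Python (excluded by Pre_solution)
  let col : Int := PySem.Str.len (PySem.List.pyGetD maps 0 "")
  let row : Int := (maps.length : Int)
  let g := make_graph maps col row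
  let V0 : List (List Bool) := List.replicate row.toNat (List.replicate col.toNat false)
  let st := (PySem.List.pyRange 0 row 1).foldl (fun st i =>
      (PySem.List.pyRange 0 col 1).foldl (fun st j =>
        if pvGetV st.1 i j = false ∧ pvGraphAt g i j ≠ 'X' then
          let r := BFS g st.1 i j row col
          (r.2, st.2 ++ [r.1])
        else st) st) (V0, ([] : List Int))
  let ans := PySem.List.sorted st.2 (fun x => x) false
  if ans.length = 0 then ans ++ [-1] else ans

-- ===== PORT B =====
-- (transliteration of Source B: union-find over cell indices i*col+j; Source B's find loops
-- `while parent[i] < i` — roots are minimal indices — so the recursion decreases on i)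

def ufFind (p : List Nat) (i : Nat) : Nat :=
  if h : p.getD i i < i then ufFind p (p.getD i i) else i
termination_by i
decreasing_by exact h

def ufUnion (p : List Nat) (a b : Nat) : List Nat :=
  if ufFind p a = ufFind p b then p
  else if ufFind p a < ufFind p b then p.set (ufFind p b) (ufFind p a)
  else p.set (ufFind p a) (ufFind p b)

def solution_alt (maps : List String) : List Int :=
  -- col = len(maps[0]): maps = [] raises IndexError in Python (excluded by Pre_solution)
  let col : Int := PySem.Str.len (PySem.List.pyGetD maps 0 "")
  let row : Int := (maps.length : Int)
  let n : Nat := (row * col).toNat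
  -- union pass over right/down neighbour edges
  let parent := (PySem.List.pyRange 0 row 1).foldl (fun p i =>
      (PySem.List.pyRange 0 col 1).foldl (fun p j =>
        if pvCharAt maps i j ≠ 'X' then
          let p1 := if i + 1 < row ∧ pvCharAt maps (i + 1) j ≠ 'X' then
              ufUnion p ((i * col + j).toNat) (((i + 1) * col + j).toNat) else p
          if j + 1 < col ∧ pvCharAt maps i (j + 1) ≠ 'X' then
              ufUnion p1 ((i * col + j).toNat) ((i * col + j + 1).toNat) else p1
        else p) p) (List.range n)
  -- accumulation pass: sums[find(idx)] += int(maps[i][j])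
  let sums := (PySem.List.pyRange 0 row 1).foldl (fun d i =>
      (PySem.List.pyRange 0 col 1).foldl (fun d j =>
        if pvCharAt maps i j ≠ 'X' then
          let r : Int := (ufFind parent ((i * col + j).toNat) : Int)
          d.insert r (d.getD r 0 + pvIntOfCell (pvCharAt maps i j))
        else d) d) (PySem.Dict.empty : PySem.Dict Int Int)
  let vals := PySem.List.sorted (PySem.Dict.values sums) (fun x => x) false
  if vals = [] then [-1] else vals

-- ===== PRECONDITION & SPEC =====
-- Pre_solution = exactly the inputs where the Python A returns: maps nonempty (else
-- len(maps[0]) raises IndexError), every row at least col = len(maps[0]) characters long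
-- (else make_graph raises IndexError), and every cell of the first col columns either 'X'
-- or a decimal digit (else int() raises ValueError).
def Pre_solution (maps : List String) : Prop :=
  maps ≠ [] ∧ maps.all (fun s =>
    decide ((maps.headD "").toList.length ≤ s.toList.length) &&
    (s.toList.take (maps.headD "").toList.length).all
      (fun c => c == 'X' || ('0' ≤ c && c ≤ '9'))) = true

instance (maps : List String) : Decidable (Pre_solution maps) := by
  unfold Pre_solution; infer_instance

def pvWitness_solution : List String := ["1X", "X2"]

def Spec_solution (maps : List String) (out : List Int) : Prop := out = solution_alt maps
instance (maps : List String) (out : List Int) : Decidable (Spec_solution maps out) := by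
  unfold Spec_solution; infer_instance

-- ===== CLAIM (what is proved, stated in full; the proofs are below) =====
def Claim_equal_solution : Prop :=
  ∀ (maps : List String), Dom_solution maps → Pre_solution maps →
    Spec_solution maps (solution maps)

-- ===== LEMMAS AND PROOFS =====

-- ---------- proof infrastructure: the grid as a graph ----------

def pvInBox (row col : Int) (p : Int × Int) : Prop :=
  0 ≤ p.1 ∧ p.1 < row ∧ 0 ≤ p.2 ∧ p.2 < col

def pvLand (ch : Int → Int → Char) (row col : Int) (p : Int × Int) : Prop :=
  pvInBox row col p ∧ ch p.1 p.2 ≠ 'X'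

def pvAdj (ch : Int → Int → Char) (row col : Int) (p q : Int × Int) : Prop :=
  pvLand ch row col p ∧ pvLand ch row col q ∧
    ((q.1 = p.1 + 1 ∧ q.2 = p.2) ∨ (q.1 = p.1 - 1 ∧ q.2 = p.2) ∨
     (q.1 = p.1 ∧ q.2 = p.2 + 1) ∨ (q.1 = p.1 ∧ q.2 = p.2 - 1))

def pvReach (ch : Int → Int → Char) (row col : Int) (s p : Int × Int) : Prop :=
  Relation.ReflTransGen (pvAdj ch row col) s p

def pvVal (ch : Int → Int → Char) (p : Int × Int) : Int := pvIntOfCell (ch p.1 p.2)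

theorem pvAdj_symm {ch : Int → Int → Char} {row col : Int} {p q : Int × Int}
    (h : pvAdj ch row col p q) : pvAdj ch row col q p :=
  ⟨h.2.1, h.1, by rcases h.2.2 with ⟨h1, h2⟩ | ⟨h1, h2⟩ | ⟨h1, h2⟩ | ⟨h1, h2⟩ <;> omega⟩

theorem pvReach_symm {ch : Int → Int → Char} {row col : Int} {p q : Int × Int}
    (h : pvReach ch row col p q) : pvReach ch row col q p :=
  Relation.ReflTransGen.symmetric (fun _ _ hab => pvAdj_symm hab) h

theorem pvLand_of_reach {ch : Int → Int → Char} {row col : Int} {s p : Int × Int}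
    (hs : pvLand ch row col s) (h : pvReach ch row col s p) : pvLand ch row col p := by
  induction h with
  | refl => exact hs
  | tail _ hadj _ => exact hadj.2.1

theorem pvReach_closure {ch : Int → Int → Char} {row col : Int} {s : Int × Int}
    (C : Finset (Int × Int)) (hs : s ∈ C)
    (hcl : ∀ p ∈ C, ∀ q, pvAdj ch row col p q → q ∈ C) :
    ∀ q, pvReach ch row col s q → q ∈ C := by
  intro q h
  induction h with
  | refl => exact hs
  | tail _ hadj ih => exact hcl _ ih _ hadj

theorem pvAdj_congr {chA chB : Int → Int → Char} {row col : Int}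
    (hg : ∀ p : Int × Int, pvInBox row col p → chA p.1 p.2 = chB p.1 p.2) (p q : Int × Int) :
    pvAdj chA row col p q ↔ pvAdj chB row col p q := by
  unfold pvAdj pvLand
  constructor
  · rintro ⟨⟨hb1, hc1⟩, ⟨hb2, hc2⟩, h3⟩
    exact ⟨⟨hb1, (hg p hb1) ▸ hc1⟩, ⟨hb2, (hg q hb2) ▸ hc2⟩, h3⟩
  · rintro ⟨⟨hb1, hc1⟩, ⟨hb2, hc2⟩, h3⟩
    exact ⟨⟨hb1, by rw [hg p hb1]; exact hc1⟩, ⟨hb2, by rw [hg q hb2]; exact hc2⟩, h3⟩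

theorem pvReach_congr {chA chB : Int → Int → Char} {row col : Int}
    (hg : ∀ p : Int × Int, pvInBox row col p → chA p.1 p.2 = chB p.1 p.2) (s p : Int × Int) :
    pvReach chA row col s p ↔ pvReach chB row col s p := by
  unfold pvReach
  constructor <;> intro h <;> induction h with
  | refl => exact Relation.ReflTransGen.refl
  | tail _ hadj ih =>
      exact Relation.ReflTransGen.tail ih (by
        first | exact (pvAdj_congr hg _ _).mp hadj | exact (pvAdj_congr hg _ _).mpr hadj)

-- the four neighbour offsets cover exactly the adjacency relation
theorem pvAdj_cases {ch : Int → Int → Char} {row col : Int} {p q : Int × Int}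
    (h : pvAdj ch row col p q) :
    q = (p.1 + 1, p.2) ∨ q = (p.1 - 1, p.2) ∨ q = (p.1, p.2 + 1) ∨ q = (p.1, p.2 - 1) := by
  have h3 := h.2.2
  rcases p with ⟨a, b⟩; rcases q with ⟨c, d⟩
  simp only [Prod.mk.injEq]
  omega


-- ---------- proof infrastructure: the visited matrix of A ----------

def pvShape (row col : Int) (V : List (List Bool)) : Prop :=
  V.length = row.toNat ∧ ∀ r ∈ V, r.length = col.toNat

def pvMemV (V : List (List Bool)) (p : Int × Int) : Prop := pvGetV V p.1 p.2 = true

def pvAt (V : List (List Bool)) (p : Int × Int) : Bool :=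
  ((V[p.1.toNat]?.getD [])[p.2.toNat]?).getD false

theorem pvIdx_inbox (n : Nat) (x : Int) (hx : 0 ≤ x) (h2 : x < (n : Int)) :
    PySem.List.pyIdx? n x = some x.toNat := by
  unfold PySem.List.pyIdx?
  rw [if_pos hx, if_pos h2]

theorem pvGetV_eval {row col : Int} {V : List (List Bool)} (hsh : pvShape row col V)
    {p : Int × Int} (hp : pvInBox row col p) :
    pvGetV V p.1 p.2 = pvAt V p := by
  obtain ⟨hb1, hb2, hb3, hb4⟩ := hp
  have h1 : p.1.toNat < V.length := by rw [hsh.1]; omega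
  have hrow : V[p.1.toNat]? = some V[p.1.toNat] := List.getElem?_eq_getElem h1
  have h2 : p.2.toNat < (V[p.1.toNat]).length := by
    rw [hsh.2 _ (List.getElem_mem _)]; omega
  unfold pvGetV pvAt PySem.List.pyGet?
  rw [pvIdx_inbox V.length p.1 hb1 (by rw [hsh.1]; omega)]
  simp only [Option.bind_some]
  rw [hrow]
  simp only [Option.bind_some, Option.getD_some]
  rw [pvIdx_inbox _ p.2 hb3 (by rw [hsh.2 _ (List.getElem_mem _)]; omega)]
  simp only [Option.bind_some]
  rw [List.getElem?_eq_getElem h2]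
  simp

theorem pvSetV_eval {row col : Int} {V : List (List Bool)} (hsh : pvShape row col V)
    {q : Int × Int} (hq : pvInBox row col q) :
    pvSetV V q.1 q.2 = V.set q.1.toNat ((V[q.1.toNat]?.getD []).set q.2.toNat true) := by
  obtain ⟨hb1, hb2, hb3, hb4⟩ := hq
  have h1 : q.1.toNat < V.length := by rw [hsh.1]; omega
  have hrow : V[q.1.toNat]? = some (V[q.1.toNat]?.getD []) := by
    rw [List.getElem?_eq_getElem h1]; simp
  rw [pvSetV_some V q.1 q.2 q.1.toNat _
    (pvIdx_inbox V.length q.1 hb1 (by rw [hsh.1]; omega)) hrow]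
  congr 1
  exact PySem.List.pySetD_of_nonneg _ _ hb3

theorem pvShape_setv {row col : Int} {V : List (List Bool)} (hsh : pvShape row col V)
    (x y : Int) : pvShape row col (pvSetV V x y) := by
  cases hk : PySem.List.pyIdx? V.length x with
  | none => rw [pvSetV_none V x y hk]; exact hsh
  | some k =>
    have hklt := pvPyIdx_lt _ _ _ hk
    have hr : V[k]? = some V[k] := List.getElem?_eq_getElem hklt
    rw [pvSetV_some V x y k _ hk hr]
    constructor
    · rw [List.length_set]; exact hsh.1
    · intro r hrm
      rcases List.mem_or_eq_of_mem_set hrm with hold | rfl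
      · exact hsh.2 _ hold
      · rw [PySem.List.length_pySetD]
        exact hsh.2 _ (List.getElem_mem _)

theorem pvMemV_setv {row col : Int} {V : List (List Bool)} (hsh : pvShape row col V)
    {q : Int × Int} (hq : pvInBox row col q) {p : Int × Int} (hp : pvInBox row col p) :
    pvMemV (pvSetV V q.1 q.2) p ↔ (p = q ∨ pvMemV V p) := by
  have hset := pvSetV_eval hsh hq
  have hsh' := pvShape_setv hsh q.1 q.2
  have hsh'' : pvShape row col (V.set q.1.toNat ((V[q.1.toNat]?.getD []).set q.2.toNat true)) := by
    rw [← hset]; exact hsh'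
  obtain ⟨hpb1, hpb2, hpb3, hpb4⟩ := hp
  obtain ⟨hqb1, hqb2, hqb3, hqb4⟩ := hq
  have hq1 : q.1.toNat < V.length := by rw [hsh.1]; omega
  have hrowq : V[q.1.toNat]? = some V[q.1.toNat] := List.getElem?_eq_getElem hq1
  have hq2 : q.2.toNat < (V[q.1.toNat]?.getD []).length := by
    rw [hrowq]; simp only [Option.getD_some]
    rw [hsh.2 _ (List.getElem_mem _)]; omega
  unfold pvMemV
  rw [pvGetV_eval hsh' ⟨hpb1, hpb2, hpb3, hpb4⟩, pvGetV_eval hsh ⟨hpb1, hpb2, hpb3, hpb4⟩]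
  rw [hset]
  unfold pvAt
  rw [List.getElem?_set]
  by_cases he1 : q.1.toNat = p.1.toNat
  · rw [if_pos he1, if_pos hq1]
    simp only [Option.getD_some]
    rw [List.getElem?_set]
    by_cases he2 : q.2.toNat = p.2.toNat
    · rw [if_pos he2, if_pos hq2]
      have hpq : p = q := by
        rcases p with ⟨a, b⟩; rcases q with ⟨c, d⟩
        simp only [Prod.mk.injEq]
        simp only at he1 he2 hpb1 hpb2 hpb3 hpb4 hqb1 hqb2 hqb3 hqb4
        omega
      simp [hpq]
    · rw [if_neg he2, he1]
      have hne : p ≠ q := by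
        intro hc; subst hc; exact he2 rfl
      simp [hne]
  · rw [if_neg he1]
    have hne : p ≠ q := by
      intro hc; subst hc; exact he1 rfl
    simp [hne]

theorem pvShape_replicate (row col : Int) :
    pvShape row col (List.replicate row.toNat (List.replicate col.toNat false)) := by
  constructor
  · simp
  · intro r hr
    rw [List.eq_of_mem_replicate hr]
    simp

theorem pvMemV_replicate (row col : Int) {p : Int × Int} (hp : pvInBox row col p) :
    ¬ pvMemV (List.replicate row.toNat (List.replicate col.toNat false)) p := by
  have hsh := pvShape_replicate row col
  unfold pvMemV
  rw [pvGetV_eval hsh hp]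
  obtain ⟨hb1, hb2, hb3, hb4⟩ := hp
  unfold pvAt
  rw [List.getElem?_replicate, if_pos (by simp; omega)]
  simp only [Option.getD_some]
  rw [List.getElem?_replicate, if_pos (by omega)]
  simp

-- ---------- correctness of A's BFS ----------

theorem pvBfsLoop_nil (g : List (List Char)) (row col : Int) (V : List (List Bool))
    (cnt : Int) : pvBfsLoop g row col V [] cnt = (cnt, V) := by
  rw [pvBfsLoop]

theorem pvBfsLoop_cons (g : List (List Char)) (row col : Int) (V : List (List Bool))
    (x y : Int) (rest : List (Int × Int)) (cnt : Int) :
    pvBfsLoop g row col V ((x, y) :: rest) cnt =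
      pvBfsLoop g row col (pvBfsExpand g row col x y (rest, pvSetV V x y, cnt)).2.1
        (pvBfsExpand g row col x y (rest, pvSetV V x y, cnt)).1
        (pvBfsExpand g row col x y (rest, pvSetV V x y, cnt)).2.2 := by
  rw [pvBfsLoop]

-- invariant of the neighbour-scan fold (relative to the popped cell (x, y))
def pvInvExp (g : List (List Char)) (row col : Int) (s : Int × Int) (V0 : List (List Bool))
    (c0 : Int) (st : List (Int × Int) × List (List Bool) × Int) (C : Finset (Int × Int)) : Prop :=
  pvShape row col st.2.1 ∧
  (∀ q ∈ st.1, q ∈ C) ∧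
  (∀ q ∈ C, pvReach (pvGraphAt g) row col s q) ∧
  s ∈ C ∧
  st.2.2 = c0 + ∑ p ∈ C, pvVal (pvGraphAt g) p ∧
  (∀ r : Int × Int, pvInBox row col r → (pvMemV st.2.1 r ↔ pvMemV V0 r ∨ r ∈ C))

def pvDirs : List (Int × Int) := [((1:Int),(0:Int)), (0,1), (-1,0), (0,-1)]

theorem pvBfsExpand_post (g : List (List Char)) (row col : Int) (s : Int × Int)
    (V0 : List (List Bool)) (c0 : Int)
    (hs : pvLand (pvGraphAt g) row col s)
    (h0 : ∀ r : Int × Int, pvInBox row col r → pvMemV V0 r →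
      ¬ pvReach (pvGraphAt g) row col s r)
    (x y : Int) (hp₀ : pvReach (pvGraphAt g) row col s (x, y)) :
    ∀ (dirs : List (Int × Int)), dirs ⊆ pvDirs →
    ∀ (st : List (Int × Int) × List (List Bool) × Int) (C : Finset (Int × Int)),
      pvInvExp g row col s V0 c0 st C →
      ∃ C' : Finset (Int × Int),
        pvInvExp g row col s V0 c0
          (dirs.foldl (fun st d =>
            let nx := x + d.1
            let ny := y + d.2
            if 0 ≤ nx ∧ nx < row ∧ 0 ≤ ny ∧ ny < col then
              if pvGraphAt g nx ny ≠ 'X' ∧ pvGetV st.2.1 nx ny = false then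
                (st.1 ++ [(nx, ny)], pvSetV st.2.1 nx ny, st.2.2 + pvIntOfCell (pvGraphAt g nx ny))
              else st
            else st) st) C' ∧
        C ⊆ C' ∧
        (∀ r ∈ C', r ∈ C ∨ r ∈ (dirs.foldl (fun st d =>
            let nx := x + d.1
            let ny := y + d.2
            if 0 ≤ nx ∧ nx < row ∧ 0 ≤ ny ∧ ny < col then
              if pvGraphAt g nx ny ≠ 'X' ∧ pvGetV st.2.1 nx ny = false then
                (st.1 ++ [(nx, ny)], pvSetV st.2.1 nx ny, st.2.2 + pvIntOfCell (pvGraphAt g nx ny))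
              else st
            else st) st).1) ∧
        (∃ app : List (Int × Int), (dirs.foldl (fun st d =>
            let nx := x + d.1
            let ny := y + d.2
            if 0 ≤ nx ∧ nx < row ∧ 0 ≤ ny ∧ ny < col then
              if pvGraphAt g nx ny ≠ 'X' ∧ pvGetV st.2.1 nx ny = false then
                (st.1 ++ [(nx, ny)], pvSetV st.2.1 nx ny, st.2.2 + pvIntOfCell (pvGraphAt g nx ny))
              else st
            else st) st).1 = st.1 ++ app) ∧
        (∀ d ∈ dirs, pvLand (pvGraphAt g) row col (x + d.1, y + d.2) →
          (x + d.1, y + d.2) ∈ C') := by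
  have hlp₀ : pvLand (pvGraphAt g) row col (x, y) := pvLand_of_reach hs hp₀
  intro dirs
  induction dirs with
  | nil =>
    intro _ st C hW
    exact ⟨C, hW, Finset.Subset.refl C, fun r hr => Or.inl hr, ⟨[], by simp⟩, by simp⟩
  | cons d t ih =>
    intro hsub st C hW
    have hd4 : d ∈ pvDirs := hsub List.mem_cons_self
    have htsub : t ⊆ pvDirs := fun e he => hsub (List.mem_cons_of_mem _ he)
    obtain ⟨W1, W2, W3, W4, W5, W6⟩ := hW
    simp only [List.foldl_cons]
    set q : Int × Int := (x + d.1, y + d.2) with hqdef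
    have hq1 : q.1 = x + d.1 := rfl
    have hq2 : q.2 = y + d.2 := rfl
    have hadj_q : pvLand (pvGraphAt g) row col q → pvAdj (pvGraphAt g) row col (x, y) q := by
      intro hlq
      refine ⟨hlp₀, hlq, ?_⟩
      simp only [pvDirs, List.mem_cons] at hd4
      rcases hd4 with rfl | rfl | rfl | rfl | h
      · simp only [hq1, hq2]; simp; try omega
      · simp only [hq1, hq2]; simp; try omega
      · simp only [hq1, hq2]; simp; try omega
      · simp only [hq1, hq2]; simp; try omega
      · simp at h
    by_cases hbox : 0 ≤ x + d.1 ∧ x + d.1 < row ∧ 0 ≤ y + d.2 ∧ y + d.2 < col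
    · rw [if_pos hbox]
      by_cases hg2 : pvGraphAt g (x + d.1) (y + d.2) ≠ 'X' ∧ pvGetV st.2.1 (x + d.1) (y + d.2) = false
      · -- accepted neighbour
        rw [if_pos hg2]
        have hqbox : pvInBox row col q := by unfold pvInBox; rw [hq1, hq2]; exact hbox
        have hlq : pvLand (pvGraphAt g) row col q := ⟨hqbox, hg2.1⟩
        have hadj := hadj_q hlq
        have hreachq : pvReach (pvGraphAt g) row col s q :=
          Relation.ReflTransGen.tail hp₀ hadj
        have hnotmem : ¬ pvMemV st.2.1 q := by
          intro hc
          unfold pvMemV at hc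
          rw [hc] at hg2
          simp at hg2
        have hqC : q ∉ C := fun hc => hnotmem ((W6 q hbox).mpr (Or.inr hc))
        have hqV0 : ¬ pvMemV V0 q := fun hc => hnotmem ((W6 q hbox).mpr (Or.inl hc))
        obtain ⟨C', hW', hsub', hnew', ⟨app, happ⟩, hcomp'⟩ :=
          ih htsub (st.1 ++ [q], pvSetV st.2.1 q.1 q.2, st.2.2 + pvIntOfCell (pvGraphAt g q.1 q.2))
            (insert q C) ⟨pvShape_setv W1 q.1 q.2,
              (by
                intro r hr
                rcases List.mem_append.mp hr with h | h
                · exact Finset.mem_insert_of_mem (W2 r h)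
                · simp at h; subst h; exact Finset.mem_insert_self _ _),
              (by
                intro r hr
                rcases Finset.mem_insert.mp hr with rfl | h
                · exact hreachq
                · exact W3 r h),
              Finset.mem_insert_of_mem W4,
              (by
                simp only []
                rw [Finset.sum_insert hqC, W5]
                simp only [pvVal]
                ring),
              (by
                intro r hrbox
                simp only []
                rw [pvMemV_setv W1 hqbox hrbox, W6 r hrbox, Finset.mem_insert]
                constructor
                · rintro (rfl | h | h)
                  · exact Or.inr (Or.inl rfl)
                  · exact Or.inl h
                  · exact Or.inr (Or.inr h)
                · rintro (h | rfl | h)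
                  · exact Or.inr (Or.inl h)
                  · exact Or.inl rfl
                  · exact Or.inr (Or.inr h))⟩
        refine ⟨C', hW', fun r hr => hsub' (Finset.mem_insert_of_mem hr), ?_, ⟨[q] ++ app, by rw [happ, List.append_assoc]⟩, ?_⟩
        · intro r hr
          rcases hnew' r hr with h | h
          · rcases Finset.mem_insert.mp h with rfl | h2
            · right
              rw [happ]
              exact List.mem_append.mpr (Or.inl (List.mem_append.mpr (Or.inr (List.mem_cons_self))))
            · exact Or.inl h2
          · exact Or.inr h
        · intro e he hle
          rcases List.mem_cons.mp he with rfl | het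
          · exact hsub' (Finset.mem_insert_self _ _)
          · exact hcomp' e het hle
      · -- neighbour rejected: either 'X' or already visited
        rw [if_neg hg2]
        obtain ⟨C', hW', hsub', hnew', ⟨app, happ⟩, hcomp'⟩ := ih htsub st C ⟨W1, W2, W3, W4, W5, W6⟩
        refine ⟨C', hW', hsub', hnew', ⟨app, happ⟩, ?_⟩
        intro e he hle
        rcases List.mem_cons.mp he with rfl | het
        · -- in this case the cell is land, so it must be already visited and in C
          have heb : pvInBox row col (x + e.1, y + e.2) := hbox
          have hnx : pvGraphAt g (x + e.1) (y + e.2) ≠ 'X' := hle.2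
          have hmem : pvGetV st.2.1 (x + e.1) (y + e.2) ≠ false := by
            intro hc
            exact hg2 ⟨hnx, hc⟩
          have hmem' : pvMemV st.2.1 (x + e.1, y + e.2) := by
            unfold pvMemV
            cases hcase : pvGetV st.2.1 (x + e.1) (y + e.2) with
            | false => exact absurd hcase hmem
            | true => rfl
          rcases (W6 _ heb).mp hmem' with h | h
          · exact absurd (Relation.ReflTransGen.tail hp₀ (hadj_q hle)) (h0 _ heb h)
          · exact hsub' h
        · exact hcomp' e het hle
    · rw [if_neg hbox]
      obtain ⟨C', hW', hsub', hnew', ⟨app, happ⟩, hcomp'⟩ := ih htsub st C ⟨W1, W2, W3, W4, W5, W6⟩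
      refine ⟨C', hW', hsub', hnew', ⟨app, happ⟩, ?_⟩
      intro e he hle
      rcases List.mem_cons.mp he with rfl | het
      · exact absurd hle.1 hbox
      · exact hcomp' e het hle

theorem pvMemV_setv_xy {row col : Int} {V : List (List Bool)} (hsh : pvShape row col V)
    (x y : Int) (hq : pvInBox row col (x, y)) {p : Int × Int} (hp : pvInBox row col p) :
    pvMemV (pvSetV V x y) p ↔ (p = (x, y) ∨ pvMemV V p) := pvMemV_setv hsh hq hp

def pvInvA (g : List (List Char)) (row col : Int) (s : Int × Int) (V0 : List (List Bool))
    (c0 : Int) (V : List (List Bool)) (Q : List (Int × Int)) (cnt : Int)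
    (C : Finset (Int × Int)) : Prop :=
  pvShape row col V ∧
  (∀ p ∈ Q, p ∈ C) ∧
  (∀ p ∈ C, pvReach (pvGraphAt g) row col s p) ∧
  s ∈ C ∧
  cnt = c0 + ∑ p ∈ C, pvVal (pvGraphAt g) p ∧
  ((Q = [s] ∧ C = {s} ∧ V = V0) ∨
    (∀ p : Int × Int, pvInBox row col p → (pvMemV V p ↔ pvMemV V0 p ∨ p ∈ C))) ∧
  (∀ p ∈ C, p ∉ Q → ∀ q, pvAdj (pvGraphAt g) row col p q → q ∈ C)

theorem pvBfsExpand_eq_foldl (g : List (List Char)) (row col x y : Int)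
    (st : List (Int × Int) × List (List Bool) × Int) :
    pvBfsExpand g row col x y st = pvDirs.foldl (fun st d =>
      let nx := x + d.1
      let ny := y + d.2
      if 0 ≤ nx ∧ nx < row ∧ 0 ≤ ny ∧ ny < col then
        if pvGraphAt g nx ny ≠ 'X' ∧ pvGetV st.2.1 nx ny = false then
          (st.1 ++ [(nx, ny)], pvSetV st.2.1 nx ny, st.2.2 + pvIntOfCell (pvGraphAt g nx ny))
        else st
      else st) st := rfl

theorem pvBfsLoop_done (g : List (List Char)) (row col : Int) (s : Int × Int)
    (V0 : List (List Bool)) (c0 : Int) (V : List (List Bool)) (cnt : Int)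
    (C : Finset (Int × Int))
    (hinv : pvInvA g row col s V0 c0 V [] cnt C) :
    ∃ F : Finset (Int × Int),
      (∀ p, pvReach (pvGraphAt g) row col s p ↔ p ∈ F) ∧
      cnt = c0 + ∑ p ∈ F, pvVal (pvGraphAt g) p ∧
      pvShape row col V ∧
      (∀ p : Int × Int, pvInBox row col p → (pvMemV V p ↔ pvMemV V0 p ∨
        pvReach (pvGraphAt g) row col s p)) := by
  obtain ⟨A1, A2, A3, A4, A5, A6, A7⟩ := hinv
  have h6 : ∀ p : Int × Int, pvInBox row col p → (pvMemV V p ↔ pvMemV V0 p ∨ p ∈ C) := by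
    rcases A6 with ⟨hQ, -, -⟩ | h
    · exact absurd hQ.symm (List.cons_ne_nil _ _)
    · exact h
  have hcl : ∀ p ∈ C, ∀ q, pvAdj (pvGraphAt g) row col p q → q ∈ C :=
    fun p hp q hadj => A7 p hp (List.not_mem_nil) q hadj
  have hiff : ∀ p, pvReach (pvGraphAt g) row col s p ↔ p ∈ C :=
    fun p => ⟨pvReach_closure C A4 hcl p, fun hp => A3 p hp⟩
  exact ⟨C, hiff, A5, A1, fun p hp => by rw [h6 p hp, hiff p]⟩

theorem pvBfsLoop_post (g : List (List Char)) (row col : Int) (s : Int × Int)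
    (V0 : List (List Bool)) (c0 : Int)
    (hs : pvLand (pvGraphAt g) row col s)
    (h0 : ∀ r : Int × Int, pvInBox row col r → pvMemV V0 r →
      ¬ pvReach (pvGraphAt g) row col s r) :
    ∀ (n : Nat) (V : List (List Bool)) (Q : List (Int × Int)) (cnt : Int)
      (C : Finset (Int × Int)),
      Q.length + 2 * pvFalseCount V ≤ n →
      pvInvA g row col s V0 c0 V Q cnt C →
      ∃ F : Finset (Int × Int),
        (∀ p, pvReach (pvGraphAt g) row col s p ↔ p ∈ F) ∧
        (pvBfsLoop g row col V Q cnt).1 = c0 + ∑ p ∈ F, pvVal (pvGraphAt g) p ∧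
        pvShape row col (pvBfsLoop g row col V Q cnt).2 ∧
        (∀ p : Int × Int, pvInBox row col p →
          (pvMemV (pvBfsLoop g row col V Q cnt).2 p ↔ pvMemV V0 p ∨
            pvReach (pvGraphAt g) row col s p)) := by
  intro n
  induction n with
  | zero =>
    intro V Q cnt C hm hinv
    have hQ : Q = [] := by
      cases Q with
      | nil => rfl
      | cons a t => simp [List.length_cons] at hm
    subst hQ
    rw [pvBfsLoop_nil]
    exact pvBfsLoop_done g row col s V0 c0 V cnt C hinv
  | succ n ih =>
    intro V Q cnt C hm hinv
    cases Q with
    | nil =>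
      rw [pvBfsLoop_nil]
      exact pvBfsLoop_done g row col s V0 c0 V cnt C hinv
    | cons hd rest =>
      obtain ⟨x, y⟩ := hd
      obtain ⟨A1, A2, A3, A4, A5, A6, A7⟩ := hinv
      have hxyC : (x, y) ∈ C := A2 _ List.mem_cons_self
      have hreach := A3 _ hxyC
      have hland : pvLand (pvGraphAt g) row col (x, y) := pvLand_of_reach hs hreach
      have hxybox : pvInBox row col (x, y) := hland.1
      -- invariant of the state after marking the popped cell
      have hW6 : ∀ r : Int × Int, pvInBox row col r →
          (pvMemV (pvSetV V x y) r ↔ pvMemV V0 r ∨ r ∈ C) := by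
        intro r hr
        rcases A6 with ⟨hQ, hC, hV⟩ | h6
        · have hxs : (x, y) = s := (List.cons_eq_cons.mp hQ).1
          rw [hV, hC]
          rw [pvMemV_setv_xy (hV ▸ A1) x y hland.1 hr]
          simp only [Finset.mem_singleton]
          rw [hxs]
          tauto
        · rw [pvMemV_setv_xy A1 x y hxybox hr, h6 r hr]
          constructor
          · rintro (rfl | h | h)
            · exact Or.inr hxyC
            · exact Or.inl h
            · exact Or.inr h
          · rintro (h | h)
            · exact Or.inr (Or.inl h)
            · exact Or.inr (Or.inr h)
      have hWst : pvInvExp g row col s V0 c0 (rest, pvSetV V x y, cnt) C :=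
        ⟨pvShape_setv A1 x y, fun p hp => A2 p (List.mem_cons_of_mem _ hp), A3, A4, A5, hW6⟩
      obtain ⟨C2, hW2, hsub2, hnew2, ⟨app, happ⟩, hcomp⟩ :=
        pvBfsExpand_post g row col s V0 c0 hs h0 x y hreach pvDirs
          (List.Subset.refl _) (rest, pvSetV V x y, cnt) C hWst
      rw [← pvBfsExpand_eq_foldl] at hW2 hnew2 happ
      set st2 := pvBfsExpand g row col x y (rest, pvSetV V x y, cnt) with hst2
      obtain ⟨W1, W2, W3, W4, W5, W6⟩ := hW2
      rw [pvBfsLoop_cons]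
      refine ih st2.2.1 st2.1 st2.2.2 C2 ?_ ?_
      · -- measure
        have h1 := pvBfsExpand_measure g row col x y (rest, pvSetV V x y, cnt)
        have h2 := pvFalseCount_setv_le V x y
        rw [← hst2] at h1
        simp only [List.length_cons] at hm
        simp at h1
        omega
      · refine ⟨W1, W2, W3, W4, W5, Or.inr W6, ?_⟩
        -- closure
        intro p hpC2 hpQ2 q hadj
        rcases hnew2 p hpC2 with hpC | hpQ
        · by_cases hp0 : p = (x, y)
          · subst hp0
            have hlq : pvLand (pvGraphAt g) row col q := hadj.2.1
            rcases pvAdj_cases hadj with hq | hq | hq | hq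
            · have : q = (x + ((1:Int),(0:Int)).1, y + ((1:Int),(0:Int)).2) := by
                rw [hq]; simp
              rw [this] at hlq ⊢
              exact hcomp _ (by simp [pvDirs]) hlq
            · have : q = (x + ((-1:Int),(0:Int)).1, y + ((-1:Int),(0:Int)).2) := by
                rw [hq]; simp; ring
              rw [this] at hlq ⊢
              exact hcomp _ (by simp [pvDirs]) hlq
            · have : q = (x + ((0:Int),(1:Int)).1, y + ((0:Int),(1:Int)).2) := by
                rw [hq]; simp
              rw [this] at hlq ⊢
              exact hcomp _ (by simp [pvDirs]) hlq
            · have : q = (x + ((0:Int),(-1:Int)).1, y + ((0:Int),(-1:Int)).2) := by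
                rw [hq]; simp; ring
              rw [this] at hlq ⊢
              exact hcomp _ (by simp [pvDirs]) hlq
          · refine hsub2 (A7 p hpC ?_ q hadj)
            intro hc
            rcases List.mem_cons.mp hc with heq | h2
            · exact hp0 heq
            · exact hpQ2 (by rw [happ]; exact List.mem_append.mpr (Or.inl h2))
        · exact absurd hpQ hpQ2

-- ---------- the copied grid agrees with the input strings on the box ----------

theorem pvGraphAt_make (maps : List String) (row col : Int) (p : Int × Int)
    (hbox : pvInBox row col p) :
    pvGraphAt (make_graph maps col row) p.1 p.2 = pvCharAt maps p.1 p.2 := by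
  obtain ⟨h1, h2, h3, h4⟩ := hbox
  unfold pvGraphAt make_graph PySem.List.pyGet?
  have hlen : ((PySem.List.pyRange 0 row 1).map (fun i =>
      (PySem.List.pyRange 0 col 1).map (fun j => pvCharAt maps i j))).length = (row - 0).toNat := by
    rw [List.length_map, PySem.List.length_pyRange_one]
  rw [pvIdx_inbox _ p.1 h1 (by rw [hlen]; omega)]
  simp only [Option.bind_some]
  rw [List.getElem?_map]
  have hidx : (PySem.List.pyRange 0 row 1)[p.1.toNat]? = some (0 + (p.1.toNat : Int)) := by
    rw [List.getElem?_eq_getElem (by rw [PySem.List.length_pyRange_one]; omega)]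
    rw [PySem.List.getElem_pyRange_one]
  rw [hidx]
  simp only [Option.map_some, Option.bind_some]
  have hlen2 : ((PySem.List.pyRange 0 col 1).map
      (fun j => pvCharAt maps (0 + (p.1.toNat : Int)) j)).length = (col - 0).toNat := by
    rw [List.length_map, PySem.List.length_pyRange_one]
  rw [pvIdx_inbox _ p.2 h3 (by rw [hlen2]; omega)]
  simp only [Option.bind_some]
  rw [List.getElem?_map]
  have hidx2 : (PySem.List.pyRange 0 col 1)[p.2.toNat]? = some (0 + (p.2.toNat : Int)) := by
    rw [List.getElem?_eq_getElem (by rw [PySem.List.length_pyRange_one]; omega)]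
    rw [PySem.List.getElem_pyRange_one]
  rw [hidx2]
  simp only [Option.map_some, Option.getD_some]
  congr 1 <;> omega

def pvCells (row col : Int) : List (Int × Int) :=
  (PySem.List.pyRange 0 row 1).flatMap (fun i =>
    (PySem.List.pyRange 0 col 1).map (fun j => (i, j)))

theorem pvCells_mem (row col : Int) (p : Int × Int) :
    p ∈ pvCells row col ↔ pvInBox row col p := by
  unfold pvCells pvInBox
  simp only [List.mem_flatMap, List.mem_map, PySem.List.mem_pyRange_one]
  constructor
  · rintro ⟨i, ⟨hi1, hi2⟩, j, ⟨hj1, hj2⟩, rfl⟩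
    exact ⟨hi1, hi2, hj1, hj2⟩
  · rintro ⟨h1, h2, h3, h4⟩
    exact ⟨p.1, ⟨h1, h2⟩, p.2, ⟨h3, h4⟩, rfl⟩

theorem pvNestedFold {σ : Type} (body : σ → Int → Int → σ) (row col : Int) (init : σ) :
    (PySem.List.pyRange 0 row 1).foldl (fun st i =>
      (PySem.List.pyRange 0 col 1).foldl (fun st j => body st i j) st) init
    = (pvCells row col).foldl (fun st p => body st p.1 p.2) init := by
  unfold pvCells
  rw [List.foldl_flatMap]
  simp only [List.foldl_map]

-- ---------- union-find: basic laws ----------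

def ufInv (p : List Nat) : Prop := ∀ j, p.getD j j ≤ j

theorem ufGetD_eq (p : List Nat) (j : Nat) : p.getD j j = (p[j]?).getD j := by
  simp [List.getD]

theorem ufFind_le (p : List Nat) (i : Nat) : ufFind p i ≤ i := by
  induction i using Nat.strong_induction_on with
  | _ i ih =>
    rw [ufFind]
    split_ifs with h
    · exact le_of_lt (lt_of_le_of_lt (ih _ h) h)
    · exact le_refl i

theorem ufFind_of_root (p : List Nat) (r : Nat) (h : p.getD r r = r) : ufFind p r = r := by
  rw [ufFind, dif_neg (show ¬ p.getD r r < r by rw [h]; exact lt_irrefl r)]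

theorem ufFind_root (p : List Nat) (hp : ufInv p) (i : Nat) :
    p.getD (ufFind p i) (ufFind p i) = ufFind p i := by
  induction i using Nat.strong_induction_on with
  | _ i ih =>
    rw [ufFind]
    split_ifs with h
    · exact ih _ h
    · have := hp i; omega

theorem ufInv_set (p : List Nat) (hp : ufInv p) {m mn : Nat} (h : mn ≤ m) :
    ufInv (p.set m mn) := by
  intro j
  rw [ufGetD_eq]
  by_cases hj : j = m
  · subst hj
    by_cases hl : j < p.length
    · rw [List.getElem?_set_self hl]; simpa using h
    · rw [List.getElem?_set, if_pos rfl, if_neg hl]; simp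
  · rw [List.getElem?_set_ne (by omega)]
    have := hp j; rw [ufGetD_eq] at this; exact this

theorem ufGetD_set_ne (p : List Nat) {m j : Nat} (mn : Nat) (h : m ≠ j) :
    (p.set m mn).getD j j = p.getD j j := by
  rw [ufGetD_eq, ufGetD_eq, List.getElem?_set_ne h]

theorem ufGetD_set_self (p : List Nat) {m : Nat} (mn : Nat) (h : m < p.length) :
    (p.set m mn).getD m m = mn := by
  rw [ufGetD_eq, List.getElem?_set_self h]; rfl

theorem ufFind_set (p : List Nat) (_hp : ufInv p) {m mn : Nat} (hm : m < p.length)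
    (hroot : p.getD m m = m) (hmn : mn < m) :
    ∀ i, ufFind (p.set m mn) i = if ufFind p i = m then ufFind p mn else ufFind p i := by
  intro i
  induction i using Nat.strong_induction_on with
  | _ i ih =>
    by_cases him : i = m
    · subst him
      have h1 : (p.set i mn).getD i i = mn := ufGetD_set_self p mn hm
      have hstep : ufFind (p.set i mn) i = ufFind (p.set i mn) mn := by
        rw [ufFind]
        simp only [h1]
        rw [dif_pos hmn]
      rw [hstep, ih mn hmn]
      have hle : ufFind p mn ≤ mn := ufFind_le p mn
      rw [if_neg (by omega), ufFind_of_root p i hroot, if_pos rfl]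
    · have h2 : (p.set m mn).getD i i = p.getD i i := ufGetD_set_ne p mn (fun hc => him hc.symm)
      by_cases h : p.getD i i < i
      · have lhs : ufFind (p.set m mn) i = ufFind (p.set m mn) (p.getD i i) := by
          rw [ufFind]
          simp only [h2]
          rw [dif_pos h]
        have rhs : ufFind p i = ufFind p (p.getD i i) := by
          rw [ufFind, dif_pos h]
        rw [lhs, rhs, ih _ h]
      · have lhs : ufFind (p.set m mn) i = i := by
          rw [ufFind]
          simp only [h2]
          rw [dif_neg h]
        have rhs : ufFind p i = i := by
          rw [ufFind, dif_neg h]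
        rw [lhs, rhs, if_neg him]

theorem length_ufUnion (p : List Nat) (a b : Nat) : (ufUnion p a b).length = p.length := by
  unfold ufUnion
  split_ifs <;> simp

theorem ufInv_ufUnion (p : List Nat) (hp : ufInv p) (a b : Nat) : ufInv (ufUnion p a b) := by
  unfold ufUnion
  split_ifs with h1 h2
  · exact hp
  · exact ufInv_set p hp (le_of_lt h2)
  · exact ufInv_set p hp (by omega)

theorem ufUnion_char (p : List Nat) (hp : ufInv p) {a b : Nat} (ha : a < p.length)
    (hb : b < p.length) (i j : Nat) :
    ufFind (ufUnion p a b) i = ufFind (ufUnion p a b) j ↔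
      (ufFind p i = ufFind p j ∨ (ufFind p i = ufFind p a ∧ ufFind p j = ufFind p b) ∨
       (ufFind p i = ufFind p b ∧ ufFind p j = ufFind p a)) := by
  unfold ufUnion
  have hroota : p.getD (ufFind p a) (ufFind p a) = ufFind p a := ufFind_root p hp a
  have hrootb : p.getD (ufFind p b) (ufFind p b) = ufFind p b := ufFind_root p hp b
  have hfa : ufFind p (ufFind p a) = ufFind p a := ufFind_of_root p _ hroota
  have hfb : ufFind p (ufFind p b) = ufFind p b := ufFind_of_root p _ hrootb
  have hla : ufFind p a < p.length := lt_of_le_of_lt (ufFind_le p a) ha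
  have hlb : ufFind p b < p.length := lt_of_le_of_lt (ufFind_le p b) hb
  by_cases he : ufFind p a = ufFind p b
  · simp only [if_pos he]
    constructor
    · exact Or.inl
    · rintro (h | ⟨h1, h2⟩ | ⟨h1, h2⟩) <;> omega
  · rw [if_neg he]
    by_cases hlt : ufFind p a < ufFind p b
    · rw [if_pos hlt]
      have hchar := ufFind_set p hp hlb hrootb hlt
      rw [hchar i, hchar j, hfa]
      split_ifs with h1 h2 h3 <;> constructor <;> intro h <;> omega
    · rw [if_neg hlt]
      have hgt : ufFind p b < ufFind p a := by omega
      have hchar := ufFind_set p hp hla hroota hgt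
      rw [hchar i, hchar j, hfb]
      split_ifs with h1 h2 h3 <;> constructor <;> intro h <;> omega

-- ---------- union-find: the fold over an edge list realises the equivalence closure ----------

def ufFoldE (E : List (Nat × Nat)) (p : List Nat) : List Nat :=
  E.foldl (fun q e => ufUnion q e.1 e.2) p

theorem ufEqv_lift {α : Sort _} {r s : α → α → Prop}
    (h : ∀ x y, r x y → Relation.EqvGen s x y) :
    ∀ {x y}, Relation.EqvGen r x y → Relation.EqvGen s x y := by
  intro x y hxy
  induction hxy with
  | rel x y h' => exact h x y h'
  | refl x => exact Relation.EqvGen.refl x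
  | symm x y _ ih => exact Relation.EqvGen.symm _ _ ih
  | trans x y z _ _ ih1 ih2 => exact Relation.EqvGen.trans _ _ _ ih1 ih2

theorem ufEqv_eq {α β : Sort _} (f : α → β) {x y : α}
    (h : Relation.EqvGen (fun a b => f a = f b) x y) : f x = f y := by
  induction h with
  | rel _ _ h' => exact h'
  | refl _ => rfl
  | symm _ _ _ ih => exact ih.symm
  | trans _ _ _ _ _ ih1 ih2 => exact ih1.trans ih2

theorem ufFoldE_char : ∀ (E : List (Nat × Nat)) (p : List Nat), ufInv p →
    (∀ e ∈ E, e.1 < p.length ∧ e.2 < p.length) →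
    ufInv (ufFoldE E p) ∧ (ufFoldE E p).length = p.length ∧
    (∀ i j, ufFind (ufFoldE E p) i = ufFind (ufFoldE E p) j ↔
      Relation.EqvGen (fun x y => ufFind p x = ufFind p y ∨ (x, y) ∈ E) i j) := by
  intro E
  induction E with
  | nil =>
    intro p hp _
    refine ⟨hp, rfl, fun i j => ⟨fun h => Relation.EqvGen.rel _ _ (Or.inl h), fun h => ?_⟩⟩
    refine ufEqv_eq (ufFind p) (ufEqv_lift (s := fun x y => ufFind p x = ufFind p y)
      (fun x y hxy => ?_) h)
    rcases hxy with h' | h'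
    · exact Relation.EqvGen.rel _ _ h'
    · simp at h'
  | cons e E ih =>
    intro p hp hE
    have ha := (hE e List.mem_cons_self).1
    have hb := (hE e List.mem_cons_self).2
    have hlen1 : (ufUnion p e.1 e.2).length = p.length := length_ufUnion p e.1 e.2
    have hp1inv : ufInv (ufUnion p e.1 e.2) := ufInv_ufUnion p hp e.1 e.2
    have hE1 : ∀ e' ∈ E, e'.1 < (ufUnion p e.1 e.2).length ∧ e'.2 < (ufUnion p e.1 e.2).length := by
      intro e' h
      rw [hlen1]
      exact hE e' (List.mem_cons_of_mem _ h)
    obtain ⟨hi1, hi2, hi3⟩ := ih (ufUnion p e.1 e.2) hp1inv hE1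
    have hchar := ufUnion_char p hp ha hb
    have hfold : ufFoldE (e :: E) p = ufFoldE E (ufUnion p e.1 e.2) := rfl
    refine ⟨by rw [hfold]; exact hi1, by rw [hfold, hi2, hlen1], fun i j => ?_⟩
    rw [hfold, hi3 i j]
    constructor
    · refine ufEqv_lift (fun x y hxy => ?_)
      rcases hxy with h | h
      · rcases (hchar x y).mp h with h' | ⟨h1, h2⟩ | ⟨h1, h2⟩
        · exact Relation.EqvGen.rel _ _ (Or.inl h')
        · exact Relation.EqvGen.trans _ _ _ (Relation.EqvGen.rel _ _ (Or.inl h1))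
            (Relation.EqvGen.trans _ _ _
              (Relation.EqvGen.rel _ _ (Or.inr (by simp)))
              (Relation.EqvGen.symm _ _ (Relation.EqvGen.rel _ _ (Or.inl h2))))
        · exact Relation.EqvGen.trans _ _ _ (Relation.EqvGen.rel _ _ (Or.inl h1))
            (Relation.EqvGen.trans _ _ _
              (Relation.EqvGen.symm _ _ (Relation.EqvGen.rel _ _ (Or.inr (by simp))))
              (Relation.EqvGen.symm _ _ (Relation.EqvGen.rel _ _ (Or.inl h2))))
      · exact Relation.EqvGen.rel _ _ (Or.inr (List.mem_cons_of_mem _ h))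
    · refine ufEqv_lift (fun x y hxy => ?_)
      rcases hxy with h | h
      · exact Relation.EqvGen.rel _ _ (Or.inl ((hchar x y).mpr (Or.inl h)))
      · rcases List.mem_cons.mp h with h' | h'
        · have hx : x = e.1 := congrArg Prod.fst h'
          have hy : y = e.2 := congrArg Prod.snd h'
          exact Relation.EqvGen.rel _ _ (Or.inl ((hchar x y).mpr
            (Or.inr (Or.inl ⟨by rw [hx], by rw [hy]⟩))))
        · exact Relation.EqvGen.rel _ _ (Or.inr h')

theorem ufGetD_range (n i : Nat) : (List.range n).getD i i = i := by
  rw [ufGetD_eq]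
  rcases lt_or_ge i n with h | h
  · simp [h]
  · simp [h]

theorem ufFind_range (n i : Nat) : ufFind (List.range n) i = i :=
  ufFind_of_root _ _ (ufGetD_range n i)

theorem ufInv_range (n : Nat) : ufInv (List.range n) :=
  fun j => le_of_eq (ufGetD_range n j)

theorem ufFoldE_range_char (n : Nat) (E : List (Nat × Nat))
    (hE : ∀ e ∈ E, e.1 < n ∧ e.2 < n) (i j : Nat) :
    ufFind (ufFoldE E (List.range n)) i = ufFind (ufFoldE E (List.range n)) j ↔
      Relation.EqvGen (fun x y => (x, y) ∈ E) i j := by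
  obtain ⟨-, -, h3⟩ := ufFoldE_char E (List.range n) (ufInv_range n)
    (by simpa [List.length_range] using hE)
  rw [h3]
  constructor
  · refine ufEqv_lift (fun x y hxy => ?_)
    rcases hxy with h | h
    · rw [ufFind_range, ufFind_range] at h
      subst h
      exact Relation.EqvGen.refl x
    · exact Relation.EqvGen.rel _ _ h
  · exact Relation.EqvGen.mono (fun x y h => Or.inr h)

-- ---------- the grid edge list and its connectivity ----------

def pvEnc (col : Int) (c : Int × Int) : Nat := (c.1 * col + c.2).toNat

theorem pvEnc_nonneg (row col : Int) (c : Int × Int) (hc : pvInBox row col c) :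
    0 ≤ c.1 * col + c.2 := by
  obtain ⟨h1, h2, h3, h4⟩ := hc
  have hcol : (0:Int) ≤ col := by omega
  have := mul_nonneg h1 hcol
  omega

theorem pvEnc_lt (row col : Int) (c : Int × Int) (hc : pvInBox row col c) :
    pvEnc col c < (row * col).toNat := by
  have h0 := pvEnc_nonneg row col c hc
  obtain ⟨h1, h2, h3, h4⟩ := hc
  have hcol : (0:Int) < col := by omega
  have h5 : c.1 * col + c.2 < row * col := by nlinarith
  unfold pvEnc
  omega

theorem pvEnc_inj (row col : Int) {c c' : Int × Int} (hc : pvInBox row col c)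
    (hc' : pvInBox row col c') (h : pvEnc col c = pvEnc col c') : c = c' := by
  have h0 := pvEnc_nonneg row col c hc
  have h0' := pvEnc_nonneg row col c' hc'
  obtain ⟨a1, a2, a3, a4⟩ := hc
  obtain ⟨b1, b2, b3, b4⟩ := hc'
  unfold pvEnc at h
  have heq : c.1 * col + c.2 = c'.1 * col + c'.2 := by omega
  have h1 : c.1 = c'.1 := by
    by_contra hne
    rcases lt_or_gt_of_ne hne with hlt | hlt <;> nlinarith
  have h2 : c.2 = c'.2 := by
    rw [h1] at heq
    linarith
  exact Prod.ext h1 h2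

def pvEdgeList (maps : List String) (row col : Int) (c : Int × Int) : List (Nat × Nat) :=
  if pvCharAt maps c.1 c.2 ≠ 'X' then
    (if c.1 + 1 < row ∧ pvCharAt maps (c.1 + 1) c.2 ≠ 'X' then
        [(pvEnc col c, pvEnc col (c.1 + 1, c.2))] else []) ++
    (if c.2 + 1 < col ∧ pvCharAt maps c.1 (c.2 + 1) ≠ 'X' then
        [(pvEnc col c, pvEnc col (c.1, c.2 + 1))] else [])
  else []

def pvEdges (maps : List String) (row col : Int) : List (Nat × Nat) :=
  (pvCells row col).flatMap (pvEdgeList maps row col)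

theorem mem_pvEdges (maps : List String) (row col : Int) (e : Nat × Nat) :
    e ∈ pvEdges maps row col ↔ ∃ c : Int × Int, pvInBox row col c ∧
      pvCharAt maps c.1 c.2 ≠ 'X' ∧
      ((c.1 + 1 < row ∧ pvCharAt maps (c.1 + 1) c.2 ≠ 'X' ∧
          e = (pvEnc col c, pvEnc col (c.1 + 1, c.2))) ∨
       (c.2 + 1 < col ∧ pvCharAt maps c.1 (c.2 + 1) ≠ 'X' ∧
          e = (pvEnc col c, pvEnc col (c.1, c.2 + 1)))) := by
  unfold pvEdges
  rw [List.mem_flatMap]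
  constructor
  · rintro ⟨c, hc, he⟩
    refine ⟨c, (pvCells_mem _ _ c).mp hc, ?_⟩
    unfold pvEdgeList at he
    by_cases h1 : pvCharAt maps c.1 c.2 ≠ 'X'
    · rw [if_pos h1] at he
      refine ⟨h1, ?_⟩
      rcases List.mem_append.mp he with h | h
      · by_cases h2 : c.1 + 1 < row ∧ pvCharAt maps (c.1 + 1) c.2 ≠ 'X'
        · rw [if_pos h2] at h
          simp at h
          exact Or.inl ⟨h2.1, h2.2, h⟩
        · rw [if_neg h2] at h
          simp at h
      · by_cases h3 : c.2 + 1 < col ∧ pvCharAt maps c.1 (c.2 + 1) ≠ 'X'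
        · rw [if_pos h3] at h
          simp at h
          exact Or.inr ⟨h3.1, h3.2, h⟩
        · rw [if_neg h3] at h
          simp at h
    · rw [if_neg h1] at he
      simp at he
  · rintro ⟨c, hbox, hland, hcase⟩
    refine ⟨c, (pvCells_mem _ _ c).mpr hbox, ?_⟩
    unfold pvEdgeList
    rw [if_pos hland]
    rcases hcase with ⟨hb, hl, rfl⟩ | ⟨hb, hl, rfl⟩
    · refine List.mem_append.mpr (Or.inl ?_)
      rw [if_pos ⟨hb, hl⟩]
      simp
    · refine List.mem_append.mpr (Or.inr ?_)
      rw [if_pos ⟨hb, hl⟩]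
      simp

theorem pvEdges_lt (maps : List String) (row col : Int) :
    ∀ e ∈ pvEdges maps row col, e.1 < (row * col).toNat ∧ e.2 < (row * col).toNat := by
  intro e he
  obtain ⟨c, hbox, hland, hcase⟩ := (mem_pvEdges maps row col e).mp he
  obtain ⟨a1, a2, a3, a4⟩ := hbox
  rcases hcase with ⟨hb, hl, rfl⟩ | ⟨hb, hl, rfl⟩
  · exact ⟨pvEnc_lt row col c ⟨a1, a2, a3, a4⟩,
      pvEnc_lt row col (c.1 + 1, c.2) ⟨by omega, hb, a3, a4⟩⟩
  · exact ⟨pvEnc_lt row col c ⟨a1, a2, a3, a4⟩,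
      pvEnc_lt row col (c.1, c.2 + 1) ⟨a1, a2, by omega, hb⟩⟩

theorem pvEqv_code (maps : List String) (row col : Int) {u v : Nat}
    (h : Relation.EqvGen (fun x y => (x, y) ∈ pvEdges maps row col) u v) :
    u = v ∨ ((∃ c, pvInBox row col c ∧ pvCharAt maps c.1 c.2 ≠ 'X' ∧ pvEnc col c = u) ∧
             (∃ c, pvInBox row col c ∧ pvCharAt maps c.1 c.2 ≠ 'X' ∧ pvEnc col c = v)) := by
  induction h with
  | rel x y h' =>
    right
    obtain ⟨c, hbox, hland, hcase⟩ := (mem_pvEdges maps row col (x, y)).mp h'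
    obtain ⟨a1, a2, a3, a4⟩ := hbox
    rcases hcase with ⟨hb, hl, he⟩ | ⟨hb, hl, he⟩
    · have hx : pvEnc col c = x := (congrArg Prod.fst he).symm
      have hy : pvEnc col (c.1 + 1, c.2) = y := (congrArg Prod.snd he).symm
      exact ⟨⟨c, ⟨a1, a2, a3, a4⟩, hland, hx⟩, ⟨(c.1 + 1, c.2), ⟨by omega, hb, a3, a4⟩, hl, hy⟩⟩
    · have hx : pvEnc col c = x := (congrArg Prod.fst he).symm
      have hy : pvEnc col (c.1, c.2 + 1) = y := (congrArg Prod.snd he).symm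
      exact ⟨⟨c, ⟨a1, a2, a3, a4⟩, hland, hx⟩, ⟨(c.1, c.2 + 1), ⟨a1, a2, by omega, hb⟩, hl, hy⟩⟩
  | refl x => exact Or.inl rfl
  | symm x y _ ih => tauto
  | trans x y z _ _ ih1 ih2 =>
    rcases ih1 with rfl | ⟨hx, hy⟩
    · exact ih2
    · rcases ih2 with rfl | ⟨_, hz⟩
      · exact Or.inr ⟨hx, hy⟩
      · exact Or.inr ⟨hx, hz⟩

theorem pvEqv_to_reach (maps : List String) (row col : Int) :
    ∀ {u v : Nat}, Relation.EqvGen (fun x y => (x, y) ∈ pvEdges maps row col) u v →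
    ∀ p q : Int × Int, pvInBox row col p → pvInBox row col q →
      pvEnc col p = u → pvEnc col q = v →
      pvReach (pvCharAt maps) row col p q := by
  intro u v h
  induction h with
  | rel x y h' =>
    intro p q hp hq hpu hqv
    obtain ⟨c, hbox, hland, hcase⟩ := (mem_pvEdges maps row col (x, y)).mp h'
    obtain ⟨a1, a2, a3, a4⟩ := hbox
    rcases hcase with ⟨hb, hl, he⟩ | ⟨hb, hl, he⟩
    · have hcu : pvEnc col c = x := (congrArg Prod.fst he).symm
      have hdv : pvEnc col (c.1 + 1, c.2) = y := (congrArg Prod.snd he).symm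
      have hdbox : pvInBox row col (c.1 + 1, c.2) := ⟨by omega, hb, a3, a4⟩
      have hpc : p = c := pvEnc_inj row col hp ⟨a1, a2, a3, a4⟩ (by rw [hpu, hcu])
      have hqd : q = (c.1 + 1, c.2) := pvEnc_inj row col hq hdbox (by rw [hqv, hdv])
      subst hpc; subst hqd
      exact Relation.ReflTransGen.tail Relation.ReflTransGen.refl
        ⟨⟨⟨a1, a2, a3, a4⟩, hland⟩, ⟨hdbox, hl⟩, Or.inl ⟨rfl, rfl⟩⟩
    · have hcu : pvEnc col c = x := (congrArg Prod.fst he).symm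
      have hdv : pvEnc col (c.1, c.2 + 1) = y := (congrArg Prod.snd he).symm
      have hdbox : pvInBox row col (c.1, c.2 + 1) := ⟨a1, a2, by omega, hb⟩
      have hpc : p = c := pvEnc_inj row col hp ⟨a1, a2, a3, a4⟩ (by rw [hpu, hcu])
      have hqd : q = (c.1, c.2 + 1) := pvEnc_inj row col hq hdbox (by rw [hqv, hdv])
      subst hpc; subst hqd
      exact Relation.ReflTransGen.tail Relation.ReflTransGen.refl
        ⟨⟨⟨a1, a2, a3, a4⟩, hland⟩, ⟨hdbox, hl⟩, Or.inr (Or.inr (Or.inl ⟨rfl, rfl⟩))⟩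
  | refl x =>
    intro p q hp hq hpu hqv
    have : p = q := pvEnc_inj row col hp hq (by rw [hpu, hqv])
    subst this
    exact Relation.ReflTransGen.refl
  | symm x y h ih =>
    intro p q hp hq hpu hqv
    exact pvReach_symm (ih q p hq hp hqv hpu)
  | trans x y z h1 h2 ih1 ih2 =>
    intro p q hp hq hpu hqv
    rcases pvEqv_code maps row col h1 with rfl | ⟨-, ⟨m, hmbox, -, hmy⟩⟩
    · exact ih2 p q hp hq hpu hqv
    · exact Relation.ReflTransGen.trans (ih1 p m hp hmbox hpu hmy)
        (ih2 m q hmbox hq hmy hqv)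

theorem pvAdj_to_eqv (maps : List String) (row col : Int) {b c : Int × Int}
    (h : pvAdj (pvCharAt maps) row col b c) :
    Relation.EqvGen (fun x y => (x, y) ∈ pvEdges maps row col) (pvEnc col b) (pvEnc col c) := by
  obtain ⟨hlb, hlc, hdir⟩ := h
  obtain ⟨b1, b2, b3, b4⟩ := hlb.1
  obtain ⟨c1, c2, c3, c4⟩ := hlc.1
  rcases pvAdj_cases ⟨hlb, hlc, hdir⟩ with h4 | h4 | h4 | h4
  · refine Relation.EqvGen.rel _ _ ((mem_pvEdges maps row col _).mpr
      ⟨b, hlb.1, hlb.2, Or.inl ⟨?_, ?_, ?_⟩⟩)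
    · have := h4 ▸ c2; simpa using this
    · have := hlc.2; rw [h4] at this; exact this
    · rw [h4]
  · have hbc : b = (c.1 + 1, c.2) := by
      rw [h4]; exact Prod.ext (by simp) (by simp)
    refine Relation.EqvGen.symm _ _ (Relation.EqvGen.rel _ _ ((mem_pvEdges maps row col _).mpr
      ⟨c, hlc.1, hlc.2, Or.inl ⟨?_, ?_, ?_⟩⟩))
    · rw [hbc] at b2; simpa using b2
    · have := hlb.2; rw [hbc] at this; exact this
    · rw [← hbc]
  · refine Relation.EqvGen.rel _ _ ((mem_pvEdges maps row col _).mpr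
      ⟨b, hlb.1, hlb.2, Or.inr ⟨?_, ?_, ?_⟩⟩)
    · have := h4 ▸ c4; simpa using this
    · have := hlc.2; rw [h4] at this; exact this
    · rw [h4]
  · have hbc : b = (c.1, c.2 + 1) := by
      rw [h4]; exact Prod.ext (by simp) (by simp)
    refine Relation.EqvGen.symm _ _ (Relation.EqvGen.rel _ _ ((mem_pvEdges maps row col _).mpr
      ⟨c, hlc.1, hlc.2, Or.inr ⟨?_, ?_, ?_⟩⟩))
    · rw [hbc] at b4; simpa using b4
    · have := hlb.2; rw [hbc] at this; exact this
    · rw [← hbc]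

theorem pvReach_to_eqv (maps : List String) (row col : Int) {p q : Int × Int}
    (h : pvReach (pvCharAt maps) row col p q) :
    Relation.EqvGen (fun x y => (x, y) ∈ pvEdges maps row col) (pvEnc col p) (pvEnc col q) := by
  induction h with
  | refl => exact Relation.EqvGen.refl _
  | tail _ hadj ih =>
    exact Relation.EqvGen.trans _ _ _ ih (pvAdj_to_eqv maps row col hadj)

-- ---------- roots, leaders and per-class sums ----------

def pvRootI (P : List Nat) (col : Int) (c : Int × Int) : Int := (ufFind P (pvEnc col c) : Int)

def pvSsum (maps : List String) (P : List Nat) (col : Int)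
    (cells : List (Int × Int)) (k : Int) : Int :=
  ((cells.filter (fun c => decide (pvCharAt maps c.1 c.2 ≠ 'X') &&
      decide (pvRootI P col c = k))).map
    (fun c => pvIntOfCell (pvCharAt maps c.1 c.2))).sum

theorem pvSsum_nil (maps : List String) (P : List Nat) (col : Int) (k : Int) :
    pvSsum maps P col [] k = 0 := rfl

theorem pvSsum_cons (maps : List String) (P : List Nat) (col : Int) (c : Int × Int)
    (cs : List (Int × Int)) (k : Int) :
    pvSsum maps P col (c :: cs) k =
      (if pvCharAt maps c.1 c.2 ≠ 'X' ∧ pvRootI P col c = k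
        then pvIntOfCell (pvCharAt maps c.1 c.2) else 0) + pvSsum maps P col cs k := by
  by_cases h1 : pvCharAt maps c.1 c.2 ≠ 'X' <;> by_cases h2 : pvRootI P col c = k <;>
    simp [pvSsum, h1, h2]

def pvLeaders (maps : List String) (P : List Nat) (col : Int) :
    List (Int × Int) → List Int → List (Int × Int)
  | [], _ => []
  | c :: cs, R =>
    if pvCharAt maps c.1 c.2 ≠ 'X' ∧ pvRootI P col c ∉ R then
      c :: pvLeaders maps P col cs (pvRootI P col c :: R)
    else pvLeaders maps P col cs R

theorem pvLeaders_congr (maps : List String) (P : List Nat) (col : Int) :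
    ∀ (cs : List (Int × Int)) {R R' : List Int},
      (∀ x, x ∈ R ↔ x ∈ R') → pvLeaders maps P col cs R = pvLeaders maps P col cs R' := by
  intro cs
  induction cs with
  | nil => intro R R' _; rfl
  | cons c cs ih =>
    intro R R' h
    rw [pvLeaders, pvLeaders]
    by_cases hc : pvCharAt maps c.1 c.2 ≠ 'X' ∧ pvRootI P col c ∉ R
    · rw [if_pos hc, if_pos ⟨hc.1, fun hm => hc.2 ((h _).mpr hm)⟩]
      exact congrArg _ (ih (fun x => by simp [h x]))
    · rw [if_neg hc, if_neg (fun hc' => hc ⟨hc'.1, fun hm => hc'.2 ((h _).mp hm)⟩)]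
      exact ih h

theorem pvLeaders_not_mem (maps : List String) (P : List Nat) (col : Int) :
    ∀ (cs : List (Int × Int)) (R : List Int) (c : Int × Int),
      c ∈ pvLeaders maps P col cs R → pvRootI P col c ∉ R := by
  intro cs
  induction cs with
  | nil => intro R c h; simp [pvLeaders] at h
  | cons a cs ih =>
    intro R c h
    rw [pvLeaders] at h
    split_ifs at h with hc
    · rcases List.mem_cons.mp h with rfl | h2
      · exact hc.2
      · exact fun hm => ih _ _ h2 (List.mem_cons_of_mem _ hm)
    · exact ih _ _ h

-- ---------- the accumulation pass builds exactly the per-class sums ----------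

theorem pvDictFold (maps : List String) (P : List Nat) (col : Int) :
    ∀ (cs : List (Int × Int)) (d : PySem.Dict Int Int), d.keys.Nodup →
    (cs.foldl (fun d c =>
        if pvCharAt maps c.1 c.2 ≠ 'X' then
          d.insert (pvRootI P col c)
            (d.getD (pvRootI P col c) 0 + pvIntOfCell (pvCharAt maps c.1 c.2))
        else d) d).items
      = d.items.map (fun kv => (kv.1, kv.2 + pvSsum maps P col cs kv.1))
        ++ (pvLeaders maps P col cs d.keys).map
            (fun c => (pvRootI P col c, pvSsum maps P col cs (pvRootI P col c))) := by
  intro cs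
  induction cs with
  | nil =>
    intro d _
    simp [pvLeaders, pvSsum_nil]
  | cons c cs ih =>
    intro d hnd
    simp only [List.foldl_cons]
    by_cases hland : pvCharAt maps c.1 c.2 ≠ 'X'
    · rw [if_pos hland]
      by_cases hmem : d.contains (pvRootI P col c) = true
      · -- existing key: the insert rewrites the entry in place
        have hkeys := PySem.Dict.keys_insert_of_contains d
          (d.getD (pvRootI P col c) 0 + pvIntOfCell (pvCharAt maps c.1 c.2)) hmem
        have hnd' : (d.insert (pvRootI P col c)
            (d.getD (pvRootI P col c) 0 + pvIntOfCell (pvCharAt maps c.1 c.2))).keys.Nodup := by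
          rw [hkeys]; exact hnd
        rw [ih _ hnd']
        have hitems := PySem.Dict.items_insert_of_contains d
          (d.getD (pvRootI P col c) 0 + pvIntOfCell (pvCharAt maps c.1 c.2)) hmem
        rw [hitems, hkeys, List.map_map]
        have hrk : pvRootI P col c ∈ d.keys := (PySem.Dict.contains_iff_mem_keys d _).mp hmem
        congr 1
        · apply List.map_congr_left
          intro kv hkv
          obtain ⟨k1, k2⟩ := kv
          have hmemit : (k1, k2) ∈ d.items := hkv
          by_cases hk : k1 = pvRootI P col c
          · subst hk
            have hv : d.getD (pvRootI P col c) 0 = k2 :=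
              PySem.Dict.getD_of_mem_items d hmemit hnd 0
            simp only [Function.comp_apply, BEq.rfl, if_true]
            rw [pvSsum_cons, if_pos ⟨hland, rfl⟩, hv]
            exact Prod.ext rfl (by ring)
          · simp only [Function.comp_apply]
            rw [if_neg (by simpa using hk)]
            rw [pvSsum_cons, if_neg (fun h => hk h.2.symm)]
            simp
        · rw [pvLeaders, if_neg (fun h => h.2 hrk)]
          apply List.map_congr_left
          intro c' hc'
          have hne : pvRootI P col c' ≠ pvRootI P col c :=
            fun h => pvLeaders_not_mem maps P col cs d.keys c' hc' (h ▸ hrk)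
          rw [pvSsum_cons, if_neg (fun h => hne h.2.symm)]
          simp
      · -- new key: the insert appends
        have hmem' : d.contains (pvRootI P col c) = false := by
          simpa using hmem
        have hgd : d.getD (pvRootI P col c) 0 = 0 :=
          PySem.Dict.getD_of_not_contains d 0 hmem'
        have hitems := PySem.Dict.items_insert_of_not_contains d
          (d.getD (pvRootI P col c) 0 + pvIntOfCell (pvCharAt maps c.1 c.2)) hmem'
        have hkeys := PySem.Dict.keys_insert_of_not_contains d
          (d.getD (pvRootI P col c) 0 + pvIntOfCell (pvCharAt maps c.1 c.2)) hmem'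
        have hnotk : pvRootI P col c ∉ d.keys :=
          fun h => by simp [(PySem.Dict.contains_iff_mem_keys d _).mpr h] at hmem'
        have hnd' : (d.insert (pvRootI P col c)
            (d.getD (pvRootI P col c) 0 + pvIntOfCell (pvCharAt maps c.1 c.2))).keys.Nodup := by
          rw [hkeys]
          simp [List.nodup_append, hnd]
          exact fun a ha h => hnotk (h ▸ ha)
        rw [ih _ hnd', hitems, hkeys, List.map_append]
        rw [pvLeaders_congr maps P col cs
          (R := d.keys ++ [pvRootI P col c]) (R' := pvRootI P col c :: d.keys)
          (fun x => by simp [or_comm])]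
        rw [pvLeaders, if_pos ⟨hland, hnotk⟩, List.map_cons]
        rw [List.append_assoc]
        congr 1
        · apply List.map_congr_left
          intro kv hkv
          have hkmem : kv.1 ∈ d.keys := List.mem_map_of_mem hkv
          have hne : kv.1 ≠ pvRootI P col c := fun h => hnotk (h ▸ hkmem)
          rw [pvSsum_cons, if_neg (fun h => hne h.2.symm)]
          simp
        · simp only [List.map_cons, List.map_nil, List.singleton_append]
          congr 1
          · rw [hgd, pvSsum_cons, if_pos ⟨hland, rfl⟩]
            simp
          · apply List.map_congr_left
            intro c' hc'
            have hne : pvRootI P col c' ≠ pvRootI P col c := by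
              have := pvLeaders_not_mem maps P col cs _ c' hc'
              exact fun h => this (h ▸ List.mem_cons_self)
            rw [pvSsum_cons, if_neg (fun h => hne h.2.symm)]
            simp
    · rw [if_neg hland, ih _ hnd]
      congr 1
      · apply List.map_congr_left
        intro kv _
        rw [pvSsum_cons, if_neg (fun h => hland h.1)]
        simp
      · rw [pvLeaders, if_neg (fun h => hland h.1)]
        apply List.map_congr_left
        intro c' _
        rw [pvSsum_cons, if_neg (fun h => hland h.1)]
        simp

theorem pvCells_nodup (row col : Int) : (pvCells row col).Nodup := by
  unfold pvCells
  rw [List.nodup_flatMap]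
  constructor
  · intro i _
    exact List.Nodup.map (fun a b h => by simpa using h)
      (PySem.List.nodup_pyRange_one 0 col)
  · refine List.Pairwise.imp ?_ (PySem.List.nodup_pyRange_one 0 row)
    intro i1 i2 hne x hx1 hx2
    simp only [List.mem_map] at hx1 hx2
    obtain ⟨j1, -, rfl⟩ := hx1
    obtain ⟨j2, -, he⟩ := hx2
    exact hne (congrArg Prod.fst he).symm

theorem pvClassSum (maps : List String) (row col : Int) (P : List Nat)
    (hfind : ∀ p q : Int × Int, pvInBox row col p → pvInBox row col q →
      pvCharAt maps p.1 p.2 ≠ 'X' → pvCharAt maps q.1 q.2 ≠ 'X' →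
      (pvRootI P col p = pvRootI P col q ↔ pvReach (pvCharAt maps) row col p q))
    {c : Int × Int} (hbox : pvInBox row col c) (hl : pvCharAt maps c.1 c.2 ≠ 'X')
    (F : Finset (Int × Int))
    (hF : ∀ q, pvReach (pvCharAt maps) row col c q ↔ q ∈ F) :
    ∑ q ∈ F, pvVal (pvCharAt maps) q =
      pvSsum maps P col (pvCells row col) (pvRootI P col c) := by
  have hnd : (pvCells row col).Nodup := pvCells_nodup row col
  have hmem : ∀ q, q ∈ (pvCells row col).filter
      (fun q => decide (pvCharAt maps q.1 q.2 ≠ 'X') &&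
        decide (pvRootI P col q = pvRootI P col c)) ↔ q ∈ F := by
    intro q
    rw [List.mem_filter]
    constructor
    · rintro ⟨hq1, hq2⟩
      simp only [Bool.and_eq_true, decide_eq_true_eq] at hq2
      have hqbox := (pvCells_mem row col q).mp hq1
      exact (hF q).mp ((hfind c q hbox hqbox hl hq2.1).mp hq2.2.symm)
    · intro hq
      have hrq := (hF q).mpr hq
      have hlq := pvLand_of_reach ⟨hbox, hl⟩ hrq
      refine ⟨(pvCells_mem row col q).mpr hlq.1, ?_⟩
      simp only [Bool.and_eq_true, decide_eq_true_eq]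
      exact ⟨hlq.2, (hfind q c hlq.1 hbox hlq.2 hl).mpr (pvReach_symm hrq)⟩
  have hlnd : ((pvCells row col).filter
      (fun q => decide (pvCharAt maps q.1 q.2 ≠ 'X') &&
        decide (pvRootI P col q = pvRootI P col c))).Nodup := hnd.filter _
  have hFl : F = ((pvCells row col).filter
      (fun q => decide (pvCharAt maps q.1 q.2 ≠ 'X') &&
        decide (pvRootI P col q = pvRootI P col c))).toFinset := by
    apply Finset.ext
    intro q
    rw [List.mem_toFinset, hmem]
  rw [hFl, List.sum_toFinset _ hlnd]
  rfl

-- ---------- A's outer scan appends exactly the class sums of the leaders ----------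

theorem pvACHAR (maps : List String) (g : List (List Char)) (row col : Int) (P : List Nat)
    (hg : ∀ p : Int × Int, pvInBox row col p → pvGraphAt g p.1 p.2 = pvCharAt maps p.1 p.2)
    (hfind : ∀ p q : Int × Int, pvInBox row col p → pvInBox row col q →
      pvCharAt maps p.1 p.2 ≠ 'X' → pvCharAt maps q.1 q.2 ≠ 'X' →
      (pvRootI P col p = pvRootI P col q ↔ pvReach (pvCharAt maps) row col p q)) :
    ∀ (cs : List (Int × Int)), (∀ p ∈ cs, pvInBox row col p) →
    ∀ (VA : List (List Bool)) (ansA : List Int) (R : List Int),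
      pvShape row col VA →
      (∀ p : Int × Int, pvInBox row col p →
        (pvMemV VA p ↔ (pvCharAt maps p.1 p.2 ≠ 'X' ∧ pvRootI P col p ∈ R))) →
      (cs.foldl (fun st p =>
        if pvGetV st.1 p.1 p.2 = false ∧ pvGraphAt g p.1 p.2 ≠ 'X' then
          let r := BFS g st.1 p.1 p.2 row col
          (r.2, st.2 ++ [r.1])
        else st) (VA, ansA)).2
      = ansA ++ (pvLeaders maps P col cs R).map
          (fun c => pvSsum maps P col (pvCells row col) (pvRootI P col c)) := by
  intro cs
  induction cs with
  | nil =>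
    intro _ VA ansA R _ _
    simp [pvLeaders]
  | cons c cs ih =>
    intro hcs VA ansA R hsh Hvis
    have hbox : pvInBox row col c := hcs c List.mem_cons_self
    have htcs : ∀ q ∈ cs, pvInBox row col q := fun q hq => hcs q (List.mem_cons_of_mem _ hq)
    simp only [List.foldl_cons]
    have hgp := hg c hbox
    have hguard : (pvGetV VA c.1 c.2 = false ∧ pvGraphAt g c.1 c.2 ≠ 'X') ↔
        (pvCharAt maps c.1 c.2 ≠ 'X' ∧ pvRootI P col c ∉ R) := by
      rw [hgp]
      constructor
      · rintro ⟨h1, h2⟩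
        refine ⟨h2, fun hc => ?_⟩
        have := (Hvis c hbox).mpr ⟨h2, hc⟩
        unfold pvMemV at this
        rw [this] at h1
        simp at h1
      · rintro ⟨h2, h1⟩
        refine ⟨?_, h2⟩
        have hnm : ¬ pvMemV VA c := fun hc => h1 ((Hvis c hbox).mp hc).2
        unfold pvMemV at hnm
        cases hcase : pvGetV VA c.1 c.2 with
        | false => rfl
        | true => exact absurd hcase hnm
    by_cases hQ : pvCharAt maps c.1 c.2 ≠ 'X' ∧ pvRootI P col c ∉ R
    · rw [if_pos (hguard.mpr hQ)]
      rw [pvLeaders, if_pos hQ, List.map_cons]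
      have hlandM : pvLand (pvCharAt maps) row col c := ⟨hbox, hQ.1⟩
      have hlandA : pvLand (pvGraphAt g) row col c := ⟨hbox, by rw [hgp]; exact hQ.1⟩
      have h0A : ∀ r : Int × Int, pvInBox row col r → pvMemV VA r →
          ¬ pvReach (pvGraphAt g) row col c r := by
        intro r hrbox hmem hr
        have hrm : pvReach (pvCharAt maps) row col c r := (pvReach_congr hg c r).mp hr
        obtain ⟨hl2, hr2⟩ := (Hvis r hrbox).mp hmem
        have : pvRootI P col r = pvRootI P col c :=
          (hfind r c hrbox hbox hl2 hQ.1).mpr (pvReach_symm hrm)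
        exact hQ.2 (this ▸ hr2)
      have hInvA : pvInvA g row col c VA 0 VA [c] (pvIntOfCell (pvGraphAt g c.1 c.2)) {c} := by
        refine ⟨hsh, ?_, ?_, Finset.mem_singleton_self c, ?_, Or.inl ⟨rfl, rfl, rfl⟩, ?_⟩
        · intro q hq
          rcases List.mem_cons.mp hq with rfl | h
          · exact Finset.mem_singleton_self q
          · simp at h
        · intro q hq
          rw [Finset.mem_singleton.mp hq]
          exact Relation.ReflTransGen.refl
        · rw [Finset.sum_singleton]
          simp [pvVal]
        · intro r hr hrnot
          exact absurd (by rw [Finset.mem_singleton.mp hr]; exact List.mem_cons_self) hrnot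
      obtain ⟨FA, hFA, hcntA, hshA, hmemA⟩ :=
        pvBfsLoop_post g row col c VA 0 hlandA h0A
          (([c] : List (Int × Int)).length + 2 * pvFalseCount VA) VA [c]
          (pvIntOfCell (pvGraphAt g c.1 c.2)) {c} (le_refl _) hInvA
      have hFm : ∀ q, pvReach (pvCharAt maps) row col c q ↔ q ∈ FA := by
        intro q
        rw [← pvReach_congr hg c q]
        exact hFA q
      have hsum : ∑ q ∈ FA, pvVal (pvGraphAt g) q =
          pvSsum maps P col (pvCells row col) (pvRootI P col c) := by
        have h1 : ∑ q ∈ FA, pvVal (pvGraphAt g) q = ∑ q ∈ FA, pvVal (pvCharAt maps) q := by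
          refine Finset.sum_congr rfl ?_
          intro q hq
          have hrq : pvReach (pvGraphAt g) row col c q := (hFA q).mpr hq
          have hlq := pvLand_of_reach hlandA hrq
          unfold pvVal
          rw [hg q hlq.1]
        rw [h1]
        exact pvClassSum maps row col P hfind hbox hQ.1 FA hFm
      have hvis' : ∀ p : Int × Int, pvInBox row col p →
          (pvMemV (BFS g VA c.1 c.2 row col).2 p ↔
            (pvCharAt maps p.1 p.2 ≠ 'X' ∧ pvRootI P col p ∈ pvRootI P col c :: R)) := by
        intro q hqbox
        have h1 : pvMemV (BFS g VA c.1 c.2 row col).2 q ↔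
            pvMemV VA q ∨ pvReach (pvGraphAt g) row col c q := hmemA q hqbox
        rw [h1, Hvis q hqbox]
        constructor
        · rintro (⟨hl, hr⟩ | hreach)
          · exact ⟨hl, List.mem_cons_of_mem _ hr⟩
          · have hrm := (pvReach_congr hg c q).mp hreach
            have hlq := pvLand_of_reach hlandM hrm
            refine ⟨hlq.2, ?_⟩
            have : pvRootI P col q = pvRootI P col c :=
              (hfind q c hqbox hbox hlq.2 hQ.1).mpr (pvReach_symm hrm)
            rw [this]
            exact List.mem_cons_self
        · rintro ⟨hl, hr⟩
          rcases List.mem_cons.mp hr with heq | hmem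
          · right
            refine (pvReach_congr hg c q).mpr ?_
            exact (hfind c q hbox hqbox hQ.1 hl).mp heq.symm
          · exact Or.inl ⟨hl, hmem⟩
      have hshA' : pvShape row col (BFS g VA c.1 c.2 row col).2 := hshA
      have hrec := ih htcs (BFS g VA c.1 c.2 row col).2
        (ansA ++ [(BFS g VA c.1 c.2 row col).1]) (pvRootI P col c :: R) hshA' hvis'
      rw [hrec]
      have hc : (BFS g VA c.1 c.2 row col).1 =
          0 + ∑ q ∈ FA, pvVal (pvGraphAt g) q := hcntA
      rw [hc, hsum]
      simp [List.append_assoc]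
    · rw [if_neg (fun hc => hQ (hguard.mp hc))]
      rw [pvLeaders, if_neg hQ]
      exact ih htcs VA ansA R hsh Hvis

-- ---------- the union pass is the edge-list fold ----------

theorem pvUnionPass_eq (maps : List String) (row col : Int) :
    (pvCells row col).foldl (fun p c =>
        if pvCharAt maps c.1 c.2 ≠ 'X' then
          let p1 := if c.1 + 1 < row ∧ pvCharAt maps (c.1 + 1) c.2 ≠ 'X' then
              ufUnion p ((c.1 * col + c.2).toNat) (((c.1 + 1) * col + c.2).toNat) else p
          if c.2 + 1 < col ∧ pvCharAt maps c.1 (c.2 + 1) ≠ 'X' then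
              ufUnion p1 ((c.1 * col + c.2).toNat) ((c.1 * col + c.2 + 1).toNat) else p1
        else p) (List.range (row * col).toNat)
    = ufFoldE (pvEdges maps row col) (List.range (row * col).toNat) := by
  unfold ufFoldE pvEdges
  rw [List.foldl_flatMap]
  refine PySem.List.foldl_congr_mem _ _ _ _ ?_
  intro p c _
  unfold pvEdgeList
  by_cases h1 : pvCharAt maps c.1 c.2 ≠ 'X'
  · rw [if_pos h1, if_pos h1]
    by_cases h2 : c.1 + 1 < row ∧ pvCharAt maps (c.1 + 1) c.2 ≠ 'X' <;>
      by_cases h3 : c.2 + 1 < col ∧ pvCharAt maps c.1 (c.2 + 1) ≠ 'X' <;>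
      simp [h2, h3, pvEnc, Int.add_assoc]
  · rw [if_neg h1, if_neg h1]
    simp

-- ---------- assembly ----------

theorem pvFinish (L : List Int) :
    (if (PySem.List.sorted L (fun x => x) false).length = 0 then
      PySem.List.sorted L (fun x => x) false ++ [-1]
    else PySem.List.sorted L (fun x => x) false) =
    (if PySem.List.sorted L (fun x => x) false = [] then [-1]
    else PySem.List.sorted L (fun x => x) false) := by
  by_cases h : PySem.List.sorted L (fun x => x) false = []
  · rw [if_pos (show (PySem.List.sorted L (fun x => x) false).length = 0 by rw [h]; rfl),
      if_pos h, h]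
    rfl
  · rw [if_neg (fun hc => h (List.length_eq_zero_iff.mp hc)), if_neg h]

theorem pvMain (maps : List String) : solution maps = solution_alt maps := by
  unfold solution solution_alt
  dsimp only
  rw [pvNestedFold, pvNestedFold, pvNestedFold]
  rw [pvUnionPass_eq]
  set col := PySem.Str.len (PySem.List.pyGetD maps 0 "") with hcol
  set row := (maps.length : Int) with hrow
  set P := ufFoldE (pvEdges maps row col) (List.range (row * col).toNat) with hPdef
  have hg : ∀ p : Int × Int, pvInBox row col p →
      pvGraphAt (make_graph maps col row) p.1 p.2 = pvCharAt maps p.1 p.2 :=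
    fun p hp => pvGraphAt_make maps row col p hp
  have hfindP : ∀ p q : Int × Int, pvInBox row col p → pvInBox row col q →
      pvCharAt maps p.1 p.2 ≠ 'X' → pvCharAt maps q.1 q.2 ≠ 'X' →
      (pvRootI P col p = pvRootI P col q ↔ pvReach (pvCharAt maps) row col p q) := by
    intro p q hp hq hlp hlq
    unfold pvRootI
    rw [Int.natCast_inj, hPdef,
      ufFoldE_range_char ((row * col).toNat) _ (pvEdges_lt maps row col)]
    constructor
    · intro h
      exact pvEqv_to_reach maps row col h p q hp hq rfl rfl
    · intro h
      exact pvReach_to_eqv maps row col h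
  have hA := pvACHAR maps (make_graph maps col row) row col P hg hfindP (pvCells row col)
    (fun p hp => (pvCells_mem row col p).mp hp)
    (List.replicate row.toNat (List.replicate col.toNat false)) [] []
    (pvShape_replicate row col)
    (fun p hp => ⟨fun h => absurd h (pvMemV_replicate row col hp),
      fun h => (List.not_mem_nil h.2).elim⟩)
  have hB := pvDictFold maps P col (pvCells row col) PySem.Dict.empty
    PySem.Dict.nodup_keys_empty
  have hbody : (pvCells row col).foldl (fun (st : PySem.Dict Int Int) (p : Int × Int) =>
        if pvCharAt maps p.1 p.2 ≠ 'X' then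
          st.insert ((ufFind P ((p.1 * col + p.2).toNat) : Int))
            (st.getD ((ufFind P ((p.1 * col + p.2).toNat) : Int)) 0 +
              pvIntOfCell (pvCharAt maps p.1 p.2))
        else st) PySem.Dict.empty
      = (pvCells row col).foldl (fun (d : PySem.Dict Int Int) (c : Int × Int) =>
        if pvCharAt maps c.1 c.2 ≠ 'X' then
          d.insert (pvRootI P col c)
            (d.getD (pvRootI P col c) 0 + pvIntOfCell (pvCharAt maps c.1 c.2))
        else d) PySem.Dict.empty :=
    PySem.List.foldl_congr_mem _ _ _ _ (fun acc x _ => by simp [pvRootI, pvEnc])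
  rw [hA, hbody]
  have hVal : ∀ (dd : PySem.Dict Int Int), dd.values = dd.items.map (fun kv => kv.2) :=
    fun dd => rfl
  rw [hVal, hB]
  simp only [PySem.Dict.keys_empty,
    show (PySem.Dict.empty : PySem.Dict Int Int).items = ([] : List (Int × Int)) from rfl,
    List.map_nil, List.nil_append, List.map_map]
  exact pvFinish _

-- ===== VERDICT (by name: the statement is the Claim_ definition above) =====
theorem solution_spec : Claim_equal_solution := by
  intro maps _ _
  unfold Spec_solution
  exact pvMain maps
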